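-- pv_equiv track=rewrite | github.com/jjoshua2/arc_agi | dupes/776ffc46_group-030/test_correct/1240.py | transform
-- ===== SOURCE A (Python) =====
-- import collections
--
-- def transform(grid: list[list[int]]) -> list[list[int]]:
--     if not grid or not grid[0]:
--         return []
--     rows, cols = len(grid), len(grid[0])
--
--     # Mark outside: non-5 cells reachable from border
--     outside = [[False] * cols for _ in range(rows)]
--     q = collections.deque()
--     # Add border non-5 cells
--     for r in range(rows):
--         for c in [0, cols - 1]:
--             if grid[r][c] != 5 and not outside[r][c]:
--                 outside[r][c] = True
--                 q.append((r, c))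
--     for c in range(cols):
--         for r in [0, rows - 1]:
--             if grid[r][c] != 5 and not outside[r][c]:
--                 outside[r][c] = True
--                 q.append((r, c))
--     directions = [(0, 1), (1, 0), (0, -1), (-1, 0)]
--     while q:
--         r, c = q.popleft()
--         for dr, dc in directions:
--             nr, nc = r + dr, c + dc
--             if 0 <= nr < rows and 0 <= nc < cols and not outside[nr][nc] and grid[nr][nc] != 5:
--                 outside[nr][nc] = True
--                 q.append((nr, nc))
--
--     # Visited for components
--     visited = [[False] * cols for _ in range(rows)]
--
--     # Find templates: enclosed components with color > 1
--     templates = {}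
--     for r in range(rows):
--         for c in range(cols):
--             if grid[r][c] > 1 and not visited[r][c] and not outside[r][c]:
--                 # BFS for component
--                 comp_color = grid[r][c]
--                 component = []
--                 q_comp = collections.deque([(r, c)])
--                 visited[r][c] = True
--                 while q_comp:
--                     cr, cc = q_comp.popleft()
--                     component.append((cr, cc))
--                     for dr, dc in directions:
--                         nr, nc = cr + dr, cc + dc
--                         if (0 <= nr < rows and 0 <= nc < cols and not visited[nr][nc]
--                             and grid[nr][nc] == comp_color and not outside[nr][nc]):
--                             visited[nr][nc] = True
--                             q_comp.append((nr, nc))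
--                 if component:
--                     # All enclosed by construction
--                     min_r = min(rr for rr, _ in component)
--                     min_c = min(cc for _, cc in component)
--                     shape = frozenset((rr - min_r, cc - min_c) for rr, cc in component)
--                     templates[shape] = comp_color
--
--     # Output grid
--     output = [row[:] for row in grid]
--
--     # Find blue components and recolor if match
--     for r in range(rows):
--         for c in range(cols):
--             if grid[r][c] == 1 and not visited[r][c]:
--                 # BFS for blue component
--                 component = []
--                 q_comp = collections.deque([(r, c)])
--                 visited[r][c] = True
--                 while q_comp:
--                     cr, cc = q_comp.popleft()
--                     component.append((cr, cc))
--                     for dr, dc in directions: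
--                         nr, nc = cr + dr, cc + dc
--                         if 0 <= nr < rows and 0 <= nc < cols and not visited[nr][nc] and grid[nr][nc] == 1:
--                             visited[nr][nc] = True
--                             q_comp.append((nr, nc))
--                 if component:
--                     min_r = min(rr for rr, _ in component)
--                     min_c = min(cc for _, cc in component)
--                     shape = frozenset((rr - min_r, cc - min_c) for rr, cc in component)
--                     if shape in templates:
--                         new_color = templates[shape]
--                         for rr, cc in component:
--                             output[rr][cc] = new_color
--
--     return output
-- ===== SOURCE B (Python) =====
-- def transform(grid: list[list[int]]) -> list[list[int]]:
--     if not grid or not grid[0]: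
--         return []
--     rows, cols = len(grid), len(grid[0])
--
--     def neighbors(r, c):
--         return [(nr, nc) for nr, nc in ((r, c + 1), (r + 1, c), (r, c - 1), (r - 1, c))
--                 if 0 <= nr < rows and 0 <= nc < cols]
--
--     # 'outside' = non-5 cells connected to the border, by monotone saturation to a fixpoint
--     outside = [[grid[r][c] != 5 and (r == 0 or r == rows - 1 or c == 0 or c == cols - 1)
--                 for c in range(cols)] for r in range(rows)]
--     while True:
--         nxt = [[outside[r][c] or (grid[r][c] != 5 and
--                                   any(outside[nr][nc] for nr, nc in neighbors(r, c)))
--                 for c in range(cols)] for r in range(rows)]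
--         if nxt == outside:
--             break
--         outside = nxt
--
--     # label propagation: every eligible cell ends up labelled with the row-major
--     # smallest cell of its component (linked = may belong to the same component)
--     def labels(elig, linked):
--         lab = [[(r, c) if elig(r, c) else None for c in range(cols)] for r in range(rows)]
--         while True:
--             nxt = [[None if lab[r][c] is None else
--                     min([lab[r][c]] + [lab[nr][nc] for nr, nc in neighbors(r, c)
--                                        if lab[nr][nc] is not None and linked(r, c, nr, nc)])
--                     for c in range(cols)] for r in range(rows)]
--             if nxt == lab:
--                 break
--             lab = nxt
--         return lab
--
--     def groups(lab):
--         comps = {}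
--         for r in range(rows):
--             for c in range(cols):
--                 if lab[r][c] is not None:
--                     comps.setdefault(lab[r][c], []).append((r, c))
--         return comps  # keys appear in row-major order of each component's minimal cell
--
--     lab_t = labels(lambda r, c: grid[r][c] > 1 and not outside[r][c],
--                    lambda r, c, nr, nc: grid[r][c] == grid[nr][nc])
--     lab_b = labels(lambda r, c: grid[r][c] == 1,
--                    lambda r, c, nr, nc: True)
--
--     def shape_of(comp):
--         r0 = min(r for r, _ in comp)
--         c0 = min(c for _, c in comp)
--         return frozenset((r - r0, c - c0) for r, c in comp)
--
--     templates = {}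
--     for (r0, c0), comp in groups(lab_t).items():
--         templates[shape_of(comp)] = grid[r0][c0]
--
--     output = [row[:] for row in grid]
--     for comp in groups(lab_b).values():
--         color = templates.get(shape_of(comp))
--         if color is not None:
--             for r, c in comp:
--                 output[r][c] = color
--     return output
-- ===== Notes on version B (the rewrite author's own statement) =====
-- stated objective: alternative
-- what changed: A's deque-BFS flood fills (border 'outside' search and the per-component template/blue searches sharing a visited matrix) are replaced by global fixpoint computations: 'outside' by monotone boolean saturation of the whole grid, and both component phases by min-label propagation that converges so every cell carries its component's row-major minimal cell, after which cells are grouped by label in one pass; template collisions still resolve last-writer-wins because groups surface in the same row-major order of their minimal cells.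
import Mathlib
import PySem

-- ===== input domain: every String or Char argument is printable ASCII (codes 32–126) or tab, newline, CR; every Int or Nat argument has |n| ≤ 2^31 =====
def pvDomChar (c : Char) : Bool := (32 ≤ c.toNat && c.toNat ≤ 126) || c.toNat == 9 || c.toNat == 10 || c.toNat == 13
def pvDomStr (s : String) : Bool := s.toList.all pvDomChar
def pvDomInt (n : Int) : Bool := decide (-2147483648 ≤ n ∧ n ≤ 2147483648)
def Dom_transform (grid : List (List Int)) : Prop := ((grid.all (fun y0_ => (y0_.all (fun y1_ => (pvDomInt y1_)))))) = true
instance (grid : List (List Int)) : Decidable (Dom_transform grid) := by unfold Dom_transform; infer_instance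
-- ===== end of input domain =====

-- B replaces A's queue-based flood fills by global fixpoint computations: 'outside' by monotone
-- boolean saturation and both component phases by min-label propagation, grouping cells by their
-- converged label instead of BFS-ing each component (objective: alternative; return value only).

-- ===== PORT A =====
-- shared cell/matrix accessors (Python's grid[r][c] etc.; all uses are bounds-guarded under Pre_)
def pvGv (grid : List (List Int)) (r c : ℕ) : Int := (grid.getD r []).getD c 0
def pvMget (m : List (List Bool)) (r c : ℕ) : Bool := (m.getD r []).getD c false
def pvMset (m : List (List Bool)) (r c : ℕ) : List (List Bool) := m.set r ((m.getD r []).set c true)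
def pvSetI (m : List (List Int)) (r c : ℕ) (v : Int) : List (List Int) := m.set r ((m.getD r []).set c v)
def pvDirs : List (Int × Int) := [(0,1),(1,0),(0,-1),(-1,0)]
-- '0 <= nr < rows and 0 <= nc < cols' for the candidate neighbour r+dr, c+dc
def pvChk (rows cols : ℕ) (r c : ℕ) (d : Int × Int) : Option (ℕ × ℕ) :=
  if 0 ≤ (r : Int) + d.1 ∧ (r : Int) + d.1 < (rows : Int) ∧ 0 ≤ (c : Int) + d.2 ∧ (c : Int) + d.2 < (cols : Int)
  then some (((r : Int) + d.1).toNat, ((c : Int) + d.2).toNat) else none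
-- pvLeb = Python's tuple ordering on (r, c); pvShape models a frozenset of cells canonically as
-- the sorted duplicate-free list of its elements (exact for the dict-key equality uses here)
def pvLeb (a b : ℕ × ℕ) : Bool := decide (a.1 < b.1 ∨ (a.1 = b.1 ∧ a.2 ≤ b.2))
def pvMinR (l : List (ℕ × ℕ)) : ℕ := ((l.map Prod.fst).min?).getD 0
def pvMinC (l : List (ℕ × ℕ)) : ℕ := ((l.map Prod.snd).min?).getD 0
def pvShape (l : List (ℕ × ℕ)) : List (ℕ × ℕ) :=
  ((l.map (fun p => (p.1 - pvMinR l, p.2 - pvMinC l))).dedup).mergeSort pvLeb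
-- A's 'while q:' BFS loop (used for outside, template and blue searches, differing in the guard
-- 'ok'); fuel-bounded, fuel is proven sufficient below
def pvBfs (rows cols : ℕ) (ok : ℕ → ℕ → Bool) :
    ℕ → List (List Bool) → List (ℕ × ℕ) → List (ℕ × ℕ) → List (List Bool) × List (ℕ × ℕ)
  | 0, vis, _, acc => (vis, acc)
  | fuel+1, vis, q, acc =>
    match q with
    | [] => (vis, acc)
    | p :: rest =>
      let s := pvDirs.foldl (fun (s : List (List Bool) × List (ℕ × ℕ)) d =>
        match pvChk rows cols p.1 p.2 d with
        | some n => if pvMget s.1 n.1 n.2 = false ∧ ok n.1 n.2 then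
            (pvMset s.1 n.1 n.2, s.2 ++ [n]) else s
        | none => s) (vis, rest)
      pvBfs rows cols ok fuel s.1 s.2 (acc ++ [p])

def transform (grid : List (List Int)) : List (List Int) :=
  if grid = [] ∨ grid.headI = [] then [] else
  let rows := grid.length
  let cols := grid.headI.length
  let fuel := rows * cols + rows * cols + 1
  -- mark outside: border seeding loops, then BFS
  let s1 := (List.range rows).foldl (fun s r => [0, cols - 1].foldl
      (fun (s : List (List Bool) × List (ℕ × ℕ)) c =>
        if pvGv grid r c ≠ 5 ∧ pvMget s.1 r c = false then (pvMset s.1 r c, s.2 ++ [(r, c)]) else s) s)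
      (List.replicate rows (List.replicate cols false), [])
  let s2 := (List.range cols).foldl (fun s c => [0, rows - 1].foldl
      (fun (s : List (List Bool) × List (ℕ × ℕ)) r =>
        if pvGv grid r c ≠ 5 ∧ pvMget s.1 r c = false then (pvMset s.1 r c, s.2 ++ [(r, c)]) else s) s) s1
  let outs := (pvBfs rows cols (fun r c => !(pvGv grid r c == 5)) fuel s2.1 s2.2 []).1
  -- templates: enclosed components with color > 1
  let st := (List.range rows).foldl (fun st r => (List.range cols).foldl
      (fun (st : List (List Bool) × PySem.Dict (List (ℕ × ℕ)) Int) c =>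
        if 1 < pvGv grid r c ∧ pvMget st.1 r c = false ∧ pvMget outs r c = false then
          let col := pvGv grid r c
          let res := pvBfs rows cols (fun a b => (pvGv grid a b == col) && !(pvMget outs a b)) fuel
            (pvMset st.1 r c) [(r, c)] []
          (res.1, st.2.insert (pvShape res.2) col)
        else st) st)
      ((List.replicate rows (List.replicate cols false), PySem.Dict.empty))
  -- blue components, recolored on a template match
  let sb := (List.range rows).foldl (fun sb r => (List.range cols).foldl
      (fun (sb : List (List Bool) × List (List Int)) c =>
        if pvGv grid r c == 1 ∧ pvMget sb.1 r c = false then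
          let res := pvBfs rows cols (fun a b => pvGv grid a b == 1) fuel (pvMset sb.1 r c) [(r, c)] []
          match (st.2).get? (pvShape res.2) with
          | some col => (res.1, res.2.foldl (fun o p => pvSetI o p.1 p.2 col) sb.2)
          | none => (res.1, sb.2)
        else sb) sb)
      (st.1, grid)
  sb.2

-- ===== PORT B =====
-- B-side primitives (kept independent of A's helpers; bridged to them in the proofs below)
def bCell (mtx : List (List Int)) (i j : ℕ) : Int := ((mtx[i]?).bind (fun row => row[j]?)).getD 0
def bFlag (mat : List (List Bool)) (i j : ℕ) : Bool := ((mat[i]?).bind (fun row => row[j]?)).getD false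
def bGetL (mat : List (List (Option (ℕ × ℕ)))) (i j : ℕ) : Option (ℕ × ℕ) :=
  ((mat[i]?).bind (fun row => row[j]?)).getD none
def bPut (mat : List (List Int)) (i j : ℕ) (u : Int) : List (List Int) :=
  mat.set i (((mat[i]?).getD []).set j u)
-- Source B's neighbour comprehension: the four candidates, kept when in bounds
def bCand (nRows nCols : ℕ) (q0 : ℤ × ℤ) : List (ℕ × ℕ) :=
  if 0 ≤ q0.1 ∧ q0.1 < (nRows : ℤ) ∧ 0 ≤ q0.2 ∧ q0.2 < (nCols : ℤ) then [(q0.1.toNat, q0.2.toNat)] else []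
def bNbrs (nRows nCols i j : ℕ) : List (ℕ × ℕ) :=
  [((i : ℤ), (j : ℤ) + 1), ((i : ℤ) + 1, (j : ℤ)), ((i : ℤ), (j : ℤ) - 1),
   ((i : ℤ) - 1, (j : ℤ))].flatMap (bCand nRows nCols)
-- Python's min of two coordinate tuples, and the frozenset of a component modelled canonically as the
-- sorted duplicate-free list of the shifted cells (exact for the dict-key equality uses here)
def bMin (s t : ℕ × ℕ) : ℕ × ℕ := if s.1 < t.1 ∨ (s.1 = t.1 ∧ s.2 ≤ t.2) then s else t
def bShape (cells : List (ℕ × ℕ)) : List (ℕ × ℕ) :=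
  let r0 := ((cells.map Prod.fst).min?).getD 0
  let c0 := ((cells.map Prod.snd).min?).getD 0
  ((cells.map (fun q0 => (q0.1 - r0, q0.2 - c0))).dedup).mergeSort
    (fun s t => decide (s.1 < t.1) || (decide (s.1 = t.1) && decide (s.2 ≤ t.2)))
-- 'while True: nxt = step(x); if nxt == x: break; x = nxt', fuel-bounded
def bLoop {α : Type} [DecidableEq α] (step : α → α) : ℕ → α → α
  | 0, st => st
  | k+1, st => let st2 := step st; if st2 = st then st else bLoop step k st2
def bSat (grid : List (List Int)) (nRows nCols : ℕ) (out : List (List Bool)) : List (List Bool) :=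
  (List.range nRows).map fun i => (List.range nCols).map fun j =>
    bFlag out i j || (!(bCell grid i j == 5) && (bNbrs nRows nCols i j).any fun q0 => bFlag out q0.1 q0.2)
def bLabStep (nRows nCols : ℕ) (linked : ℕ → ℕ → ℕ → ℕ → Bool)
    (lab : List (List (Option (ℕ × ℕ)))) : List (List (Option (ℕ × ℕ))) :=
  (List.range nRows).map fun i => (List.range nCols).map fun j =>
    match bGetL lab i j with
    | none => none
    | some u => some (((bNbrs nRows nCols i j).filterMap (fun q =>
        match bGetL lab q.1 q.2 with
        | some w => if linked i j q.1 q.2 then some w else none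
        | none => none)).foldl bMin u)
def bLabels (nRows nCols : ℕ) (elig : ℕ → ℕ → Bool) (linked : ℕ → ℕ → ℕ → ℕ → Bool) :
    List (List (Option (ℕ × ℕ))) :=
  bLoop (bLabStep nRows nCols linked) (nRows * nCols * (nRows * nCols) + 1)
    ((List.range nRows).map fun i => (List.range nCols).map fun j => if elig i j then some (i, j) else none)
def bGroups (nRows nCols : ℕ) (lab : List (List (Option (ℕ × ℕ)))) :
    PySem.Dict (ℕ × ℕ) (List (ℕ × ℕ)) :=
  (List.range nRows).foldl (fun acc i => (List.range nCols).foldl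
    (fun (acc : PySem.Dict (ℕ × ℕ) (List (ℕ × ℕ))) j =>
      match bGetL lab i j with
      | some L => acc.modify L [] (· ++ [(i, j)])
      | none => acc) acc) PySem.Dict.empty

def transform_alt (grid : List (List Int)) : List (List Int) :=
  if grid = [] ∨ grid.headI = [] then [] else
  let nRows := grid.length
  let nCols := grid.headI.length
  let out0 := (List.range nRows).map fun i => (List.range nCols).map fun j =>
      !(bCell grid i j == 5) && (i == 0 || i == nRows - 1 || j == 0 || j == nCols - 1)
  let outs := bLoop (bSat grid nRows nCols) (nRows * nCols + 1) out0
  let labT := bLabels nRows nCols (fun i j => 1 < bCell grid i j && !(bFlag outs i j))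
      (fun i j nr nc => bCell grid i j == bCell grid nr nc)
  let labB := bLabels nRows nCols (fun i j => bCell grid i j == 1) (fun _ _ _ _ => true)
  let tmpl := (bGroups nRows nCols labT).items.foldl
      (fun (acc : PySem.Dict (List (ℕ × ℕ)) Int) kv => acc.insert (bShape kv.2) (bCell grid kv.1.1 kv.1.2))
      PySem.Dict.empty
  (bGroups nRows nCols labB).items.foldl (fun cur kv =>
      match tmpl.get? (bShape kv.2) with
      | some col => kv.2.foldl (fun cur q0 => bPut cur q0.1 q0.2 col) cur
      | none => cur) grid

-- ===== PRECONDITION & SPEC =====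
-- Pre_ excludes exactly the ragged grids on which A raises IndexError (some row shorter than row 0)
def Pre_transform (grid : List (List Int)) : Prop := ∀ row ∈ grid, grid.headI.length ≤ row.length
instance (grid : List (List Int)) : Decidable (Pre_transform grid) := by unfold Pre_transform; infer_instance
def pvWitness_transform : List (List Int) :=
  [[5,5,5,0,0],[5,2,5,0,1],[5,5,5,0,0],[0,0,0,0,0]]
def Spec_transform (grid : List (List Int)) (out : List (List Int)) : Prop := out = transform_alt grid
instance (grid : List (List Int)) (out : List (List Int)) : Decidable (Spec_transform grid out) := by unfold Spec_transform; infer_instance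

-- ===== CLAIM (what is proved, stated in full; the proofs are below) =====
def Claim_equal_transform : Prop := ∀ (grid : List (List Int)), Dom_transform grid → Pre_transform grid → Spec_transform grid (transform grid)

-- ===== LEMMAS AND PROOFS =====
-- ---------- proof-side vocabulary and bridges from the B-port primitives ----------
def pvNbrs (rows cols : ℕ) (r c : ℕ) : List (ℕ × ℕ) := pvDirs.filterMap (pvChk rows cols r c)
def pvLget (m : List (List (Option (ℕ × ℕ)))) (r c : ℕ) : Option (ℕ × ℕ) := (m.getD r []).getD c none
def pvPmin (a b : ℕ × ℕ) : ℕ × ℕ := if pvLeb a b then a else b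

lemma bCell_e (g : List (List Int)) (r c : ℕ) : bCell g r c = pvGv g r c := by
  unfold bCell pvGv
  cases h : g[r]? with
  | none => simp [List.getD_eq_getElem?_getD, h]
  | some row => simp [List.getD_eq_getElem?_getD, h]

lemma bFlag_e (m : List (List Bool)) (r c : ℕ) : bFlag m r c = pvMget m r c := by
  unfold bFlag pvMget
  cases h : m[r]? with
  | none => simp [List.getD_eq_getElem?_getD, h]
  | some row => simp [List.getD_eq_getElem?_getD, h]

lemma bGetL_e (m : List (List (Option (ℕ × ℕ)))) (r c : ℕ) : bGetL m r c = pvLget m r c := by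
  unfold bGetL pvLget
  cases h : m[r]? with
  | none => simp [List.getD_eq_getElem?_getD, h]
  | some row => simp [List.getD_eq_getElem?_getD, h]

lemma bPut_e (m : List (List Int)) (r c : ℕ) (v : Int) : bPut m r c v = pvSetI m r c v := by
  unfold bPut pvSetI
  rw [List.getD_eq_getElem?_getD]

lemma bMin_fun : bMin = pvPmin := by
  funext a b
  unfold bMin pvPmin pvLeb
  by_cases h : a.1 < b.1 ∨ (a.1 = b.1 ∧ a.2 ≤ b.2)
  · rw [if_pos h, if_pos (by simpa using h)]
  · rw [if_neg h, if_neg (by simpa using h)]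

lemma bShape_e (l : List (ℕ × ℕ)) : bShape l = pvShape l := by
  have hb : (fun a b : ℕ × ℕ => decide (a.1 < b.1) || (decide (a.1 = b.1) && decide (a.2 ≤ b.2)))
      = pvLeb := by
    funext a b
    unfold pvLeb
    by_cases h1 : a.1 < b.1 <;> by_cases h2 : a.1 = b.1 <;> by_cases h3 : a.2 ≤ b.2 <;>
      simp [h1, h2, h3]
  simp only [bShape, pvShape, pvMinR, pvMinC, hb]

lemma bNbrs_eq (rows cols r c : ℕ) : bNbrs rows cols r c = pvNbrs rows cols r c := by
  have s : ∀ d : ℤ × ℤ, bCand rows cols ((r : ℤ) + d.1, (c : ℤ) + d.2)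
      = (pvChk rows cols r c d).toList := by
    intro d
    unfold bCand pvChk
    split_ifs with h
    · rfl
    · rfl
  have e1 := s (0, 1)
  have e2 := s (1, 0)
  have e3 := s (0, -1)
  have e4 := s (-1, 0)
  simp only [add_zero] at e1 e2 e3 e4
  unfold bNbrs pvNbrs pvDirs
  rw [List.filterMap_eq_flatMap_toList]
  simp only [List.flatMap_cons, List.flatMap_nil, List.append_nil]
  rw [show (c : ℤ) - 1 = (c : ℤ) + (-1) by ring, show (r : ℤ) - 1 = (r : ℤ) + (-1) by ring]
  rw [e1, e2, e3, e4]

-- ---------- basic cell geometry ----------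
def pvInB (rows cols : ℕ) (p : ℕ × ℕ) : Prop := p.1 < rows ∧ p.2 < cols

lemma pvChk_eq_some {rows cols r c : ℕ} {d : Int × Int} {q : ℕ × ℕ} :
    pvChk rows cols r c d = some q ↔
      (0 ≤ (r : ℤ) + d.1 ∧ (r : ℤ) + d.1 < rows ∧ 0 ≤ (c : ℤ) + d.2 ∧ (c : ℤ) + d.2 < cols ∧
       (q.1 : ℤ) = (r : ℤ) + d.1 ∧ (q.2 : ℤ) = (c : ℤ) + d.2) := by
  unfold pvChk
  split_ifs with h
  · simp only [Option.some.injEq, Prod.ext_iff]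
    omega
  · simp only [reduceCtorEq, false_iff]
    omega

lemma mem_pvNbrs {rows cols r c : ℕ} {q : ℕ × ℕ} :
    q ∈ pvNbrs rows cols r c ↔ (q.1 < rows ∧ q.2 < cols ∧
      ((q.1 = r ∧ q.2 = c + 1) ∨ (q.1 = r + 1 ∧ q.2 = c) ∨
       (q.1 = r ∧ q.2 + 1 = c) ∨ (q.1 + 1 = r ∧ q.2 = c))) := by
  simp only [pvNbrs, List.mem_filterMap, pvDirs, List.mem_cons, List.not_mem_nil, or_false]
  constructor
  · rintro ⟨d, hd, hc⟩
    rcases hd with h | h | h | h <;> subst h <;> rw [pvChk_eq_some] at hc <;> omega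
  · intro h
    rcases h.2.2 with h' | h' | h' | h'
    · exact ⟨(0, 1), by tauto, pvChk_eq_some.2 (by omega)⟩
    · exact ⟨(1, 0), by tauto, pvChk_eq_some.2 (by omega)⟩
    · exact ⟨(0, -1), by tauto, pvChk_eq_some.2 (by omega)⟩
    · exact ⟨(-1, 0), by tauto, pvChk_eq_some.2 (by omega)⟩

lemma pvNbrs_nodup (rows cols r c : ℕ) : (pvNbrs rows cols r c).Nodup := by
  apply List.Nodup.filterMap
  · intro d d' q hq hq'
    simp only [Option.mem_def, pvChk_eq_some] at hq hq'
    have := hq.2.2.2.2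
    have := hq'.2.2.2.2
    exact Prod.ext_iff.2 ⟨by omega, by omega⟩
  · simp [pvDirs]

lemma pvNbrs_symm {rows cols : ℕ} {p q : ℕ × ℕ} (hp : pvInB rows cols p) :
    q ∈ pvNbrs rows cols p.1 p.2 → p ∈ pvNbrs rows cols q.1 q.2 := by
  intro h
  rw [mem_pvNbrs] at h ⊢
  obtain ⟨h1, h2⟩ := hp
  omega

lemma pvNbrs_inB {rows cols r c : ℕ} {q : ℕ × ℕ} (h : q ∈ pvNbrs rows cols r c) :
    pvInB rows cols q := by
  rw [mem_pvNbrs] at h; exact ⟨h.1, h.2.1⟩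

-- reachability through 'ok' cells from 'seed' cells (steps along in-bounds orthogonal neighbours)
inductive pvReach (rows cols : ℕ) (ok : ℕ × ℕ → Prop) (seed : ℕ × ℕ → Prop) : ℕ × ℕ → Prop
  | base (p : ℕ × ℕ) : seed p → pvReach rows cols ok seed p
  | step (p q : ℕ × ℕ) : pvReach rows cols ok seed p → q ∈ pvNbrs rows cols p.1 p.2 →
      ok q → pvReach rows cols ok seed q

lemma pvReach_subset_of_closed {rows cols : ℕ} {ok seed Blk F : ℕ × ℕ → Prop}
    (hseed : ∀ p, seed p → F p)
    (hclosed : ∀ p q, F p → q ∈ pvNbrs rows cols p.1 p.2 → ok q → Blk q ∨ F q)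
    (hblk : ∀ p, pvReach rows cols ok seed p → ¬ Blk p) :
    ∀ p, pvReach rows cols ok seed p → F p := by
  intro p h
  induction h with
  | base p hp => exact hseed p hp
  | step p q hr hn hq ih =>
    rcases hclosed p q ih hn hq with h' | h'
    · exact absurd h' (hblk q (.step p q hr hn hq))
    · exact h'

-- ---------- boolean matrices ----------
def pvDims (rows cols : ℕ) (m : List (List Bool)) : Prop :=
  m.length = rows ∧ ∀ row ∈ m, row.length = cols

def pvVis (m : List (List Bool)) (p : ℕ × ℕ) : Prop := pvMget m p.1 p.2 = true

lemma pvDims_replicate (rows cols : ℕ) :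
    pvDims rows cols (List.replicate rows (List.replicate cols false)) := by
  refine ⟨by simp, fun row hrow => ?_⟩
  simp only [List.mem_replicate] at hrow
  simp [hrow.2]

lemma pv_getD_mem {m : List (List Bool)} {r : ℕ} (h : r < m.length) : m.getD r [] ∈ m := by
  rw [List.getD_eq_getElem _ _ h]; exact List.getElem_mem h

lemma pvDims_mset {rows cols : ℕ} {m : List (List Bool)} (h : pvDims rows cols m) (r c : ℕ) :
    pvDims rows cols (pvMset m r c) := by
  obtain ⟨h1, h2⟩ := h
  by_cases hr : r < m.length
  · refine ⟨by simp [pvMset, h1], fun row hrow => ?_⟩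
    rcases List.mem_or_eq_of_mem_set hrow with h' | h'
    · exact h2 _ h'
    · subst h'
      rw [List.length_set]
      exact h2 _ (pv_getD_mem hr)
  · unfold pvMset
    rw [List.set_eq_of_length_le (by omega)]
    exact ⟨h1, h2⟩
      
lemma pvMget_oob {rows cols : ℕ} {m : List (List Bool)} (h : pvDims rows cols m)
    {p : ℕ × ℕ} (hp : ¬ pvInB rows cols p) : pvMget m p.1 p.2 = false := by
  obtain ⟨h1, h2⟩ := h
  unfold pvInB at hp
  push_neg at hp
  unfold pvMget
  by_cases hr : p.1 < m.length
  · have hrow := h2 _ (pv_getD_mem hr)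
    exact List.getD_eq_default _ _ (by omega)
  · rw [show m.getD p.1 [] = [] from List.getD_eq_default _ _ (by omega)]
    simp

lemma pvMget_mset {rows cols : ℕ} {m : List (List Bool)} (h : pvDims rows cols m)
    {r c : ℕ} (hr : r < rows) (hc : c < cols) (a b : ℕ) :
    pvMget (pvMset m r c) a b = if a = r ∧ b = c then true else pvMget m a b := by
  obtain ⟨h1, h2⟩ := h
  have hrm : r < m.length := by omega
  have hrow : (m.getD r []).length = cols := h2 _ (pv_getD_mem hrm)
  have e1 : (pvMset m r c).getD r [] = (m.getD r []).set c true := by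
    unfold pvMset
    rw [List.getD_eq_getElem _ _ (by simpa using hrm), List.getElem_set_self]
  have e2 : ∀ a, a ≠ r → (pvMset m r c).getD a [] = m.getD a [] := by
    intro a ha
    unfold pvMset
    simp [List.getD_eq_getElem?_getD, List.getElem?_set_ne (Ne.symm ha)]
  unfold pvMget
  by_cases hab : a = r
  · subst hab
    rw [e1]
    by_cases hbc : b = c
    · subst hbc
      simp only [and_self, if_true]
      rw [List.getD_eq_getElem _ _ (by rw [List.length_set, hrow]; omega), List.getElem_set_self]
    · simp only [hbc, and_false, if_false]
      simp [List.getD_eq_getElem?_getD, List.getElem?_set_ne (Ne.symm hbc)]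
  · simp only [hab, false_and, if_false, e2 a hab]

lemma pvVis_mset {rows cols : ℕ} {m : List (List Bool)} (h : pvDims rows cols m)
    {x : ℕ × ℕ} (hx : pvInB rows cols x) (p : ℕ × ℕ) :
    pvVis (pvMset m x.1 x.2) p ↔ (p = x ∨ pvVis m p) := by
  unfold pvVis
  rw [pvMget_mset h hx.1 hx.2]
  constructor
  · intro h'
    split_ifs at h' with hc
    · left; exact Prod.ext_iff.2 ⟨hc.1, hc.2⟩
    · right; exact h'
  · intro h'
    rcases h' with h' | h'
    · subst h'; simp
    · split_ifs <;> simp [h']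
-- ---------- the cell enumeration and unvisited counting ----------
def pvCells (rows cols : ℕ) : List (ℕ × ℕ) :=
  (List.range rows).flatMap (fun r => (List.range cols).map (fun c => (r, c)))

lemma mem_pvCells {rows cols : ℕ} {p : ℕ × ℕ} :
    p ∈ pvCells rows cols ↔ pvInB rows cols p := by
  obtain ⟨a, b⟩ := p
  simp [pvCells, pvInB, Prod.ext_iff]

lemma pvCells_nodup (rows cols : ℕ) : (pvCells rows cols).Nodup := by
  rw [pvCells, List.nodup_flatMap]
  refine ⟨fun r _ => List.Nodup.map (fun a b h => (Prod.ext_iff.1 h).2) List.nodup_range, ?_⟩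
  refine List.Pairwise.imp ?_ (List.nodup_range (n := rows))
  intro a b hne
  intro q hq₁ hq₂
  simp only [List.mem_map] at hq₁ hq₂
  obtain ⟨c₁, _, e₁⟩ := hq₁
  obtain ⟨c₂, _, e₂⟩ := hq₂
  rw [← e₂] at e₁
  exact hne (Prod.ext_iff.1 e₁).1

def pvUnvis (rows cols : ℕ) (m : List (List Bool)) : ℕ :=
  ((pvCells rows cols).filter (fun p => !pvMget m p.1 p.2)).length

lemma pv_filter_length_step {α : Type} {l : List α} (hl : l.Nodup) {x : α} (hx : x ∈ l)
    {f g : α → Bool} (hfx : f x = true) (hgx : g x = false)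
    (hfg : ∀ y ∈ l, y ≠ x → f y = g y) : (l.filter g).length + 1 = (l.filter f).length := by
  induction l with
  | nil => cases hx
  | cons a t ih =>
    rcases List.mem_cons.1 hx with rfl | hx'
    · have ht : ∀ y ∈ t, f y = g y := by
        intro y hy
        exact hfg y (List.mem_cons_of_mem _ hy) (fun h => (List.nodup_cons.1 hl).1 (h ▸ hy))
      rw [List.filter_cons, List.filter_cons, List.filter_congr ht, if_pos hfx,
        if_neg (by simp [hgx])]
      simp
    · have hax : a ≠ x := fun h => (List.nodup_cons.1 hl).1 (h ▸ hx')
      have hfa := hfg a List.mem_cons_self hax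
      have ihr := ih (List.nodup_cons.1 hl).2 hx'
        (fun y hy hne => hfg y (List.mem_cons_of_mem _ hy) hne)
      rw [List.filter_cons, List.filter_cons, ← hfa]
      by_cases hfa' : f a = true
      · rw [if_pos hfa', if_pos hfa']
        simp only [List.length_cons]
        omega
      · rw [if_neg hfa', if_neg hfa']
        exact ihr

lemma pvUnvis_mset {rows cols : ℕ} {m : List (List Bool)} (hd : pvDims rows cols m)
    {x : ℕ × ℕ} (hx : pvInB rows cols x) (hv : pvMget m x.1 x.2 = false) :
    pvUnvis rows cols (pvMset m x.1 x.2) + 1 = pvUnvis rows cols m := by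
  apply pv_filter_length_step (pvCells_nodup rows cols) (mem_pvCells.2 hx)
  · simp [hv]
  · simp only [Bool.not_eq_eq_eq_not, Bool.not_false]
    rw [pvMget_mset hd hx.1 hx.2]
    simp
  · intro y _ hne
    simp only [Bool.not_inj_iff]
    rw [pvMget_mset hd hx.1 hx.2]
    rw [if_neg (fun (h : y.1 = x.1 ∧ y.2 = x.2) => hne (Prod.ext_iff.2 h))]

-- ---------- marking a list of cells ----------
def pvMarkAll (m : List (List Bool)) (L : List (ℕ × ℕ)) : List (List Bool) :=
  L.foldl (fun m n => pvMset m n.1 n.2) m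

lemma pvMarkAll_dims {rows cols : ℕ} {L : List (ℕ × ℕ)} :
    ∀ {m : List (List Bool)}, pvDims rows cols m → pvDims rows cols (pvMarkAll m L) := by
  induction L with
  | nil => intro m h; exact h
  | cons x t ih => intro m h; exact ih (pvDims_mset h x.1 x.2)

lemma pvVis_markAll {rows cols : ℕ} {L : List (ℕ × ℕ)} (hL : ∀ x ∈ L, pvInB rows cols x) :
    ∀ {m : List (List Bool)}, pvDims rows cols m → ∀ p,
      (pvVis (pvMarkAll m L) p ↔ (p ∈ L ∨ pvVis m p)) := by
  induction L with
  | nil => intro m _ p; simp [pvMarkAll]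
  | cons x t ih =>
    intro m hd p
    have hx := hL x List.mem_cons_self
    have := ih (fun y hy => hL y (List.mem_cons_of_mem _ hy)) (pvDims_mset hd x.1 x.2) p
    show pvVis (pvMarkAll (pvMset m x.1 x.2) t) p ↔ _
    rw [this, pvVis_mset hd hx p]
    simp only [List.mem_cons]
    tauto

lemma pvUnvis_markAll {rows cols : ℕ} {L : List (ℕ × ℕ)} :
    ∀ {m : List (List Bool)}, pvDims rows cols m → L.Nodup → (∀ x ∈ L, pvInB rows cols x) →
      (∀ x ∈ L, pvMget m x.1 x.2 = false) →
      pvUnvis rows cols (pvMarkAll m L) + L.length = pvUnvis rows cols m := by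
  induction L with
  | nil => intro m _ _ _ _; simp [pvMarkAll]
  | cons x t ih =>
    intro m hd hnd hin hun
    have hx := hin x List.mem_cons_self
    have hxm := hun x List.mem_cons_self
    have step := pvUnvis_mset hd hx hxm
    have htl : ∀ y ∈ t, pvMget (pvMset m x.1 x.2) y.1 y.2 = false := by
      intro y hy
      rw [pvMget_mset hd hx.1 hx.2]
      rw [if_neg (fun (h : y.1 = x.1 ∧ y.2 = x.2) => (List.nodup_cons.1 hnd).1
        ((Prod.ext_iff.2 h : y = x) ▸ hy))]
      exact hun y (List.mem_cons_of_mem _ hy)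
    have := ih (pvDims_mset hd x.1 x.2) (List.nodup_cons.1 hnd).2
      (fun y hy => hin y (List.mem_cons_of_mem _ hy)) htl
    show pvUnvis rows cols (pvMarkAll (pvMset m x.1 x.2) t) + (t.length + 1) = _
    omega

-- ---------- the BFS step fold over the four directions ----------
lemma pvBfs_fold (rows cols : ℕ) (ok : ℕ → ℕ → Bool) (p : ℕ × ℕ) :
    ∀ (l : List (ℕ × ℕ)), l.Nodup → (∀ x ∈ l, pvInB rows cols x) →
    ∀ (vis : List (List Bool)) (rest : List (ℕ × ℕ)), pvDims rows cols vis →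
    l.foldl (fun (s : List (List Bool) × List (ℕ × ℕ)) n =>
        if pvMget s.1 n.1 n.2 = false ∧ ok n.1 n.2 then (pvMset s.1 n.1 n.2, s.2 ++ [n]) else s)
      (vis, rest)
    = (pvMarkAll vis (l.filter (fun n => !pvMget vis n.1 n.2 && ok n.1 n.2)),
       rest ++ l.filter (fun n => !pvMget vis n.1 n.2 && ok n.1 n.2)) := by
  intro l
  induction l with
  | nil => intro _ _ vis rest _; simp [pvMarkAll]
  | cons x t ih =>
    intro hnd hin vis rest hd
    have hx := hin x List.mem_cons_self
    rw [List.foldl_cons, List.filter_cons]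
    by_cases hc : pvMget vis x.1 x.2 = false ∧ ok x.1 x.2 = true
    · rw [if_pos hc, if_pos (by simp [hc.1, hc.2])]
      have hcongr : ∀ n ∈ t, (!pvMget (pvMset vis x.1 x.2) n.1 n.2 && ok n.1 n.2)
          = (!pvMget vis n.1 n.2 && ok n.1 n.2) := by
        intro n hn
        rw [pvMget_mset hd hx.1 hx.2, if_neg (fun (h : n.1 = x.1 ∧ n.2 = x.2) =>
          (List.nodup_cons.1 hnd).1 ((Prod.ext_iff.2 h : n = x) ▸ hn))]
      rw [ih (List.nodup_cons.1 hnd).2 (fun y hy => hin y (List.mem_cons_of_mem _ hy))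
        (pvMset vis x.1 x.2) (rest ++ [x]) (pvDims_mset hd x.1 x.2)]
      rw [List.filter_congr hcongr]
      simp only [Prod.mk.injEq]
      exact ⟨rfl, by simp⟩
    · have hc' : ¬ (!pvMget vis x.1 x.2 && ok x.1 x.2) = true := by
        simp only [Bool.and_eq_true, Bool.not_eq_eq_eq_not, Bool.not_true]
        intro h
        exact hc ⟨by simpa using h.1, h.2⟩
      rw [if_neg hc, if_neg hc']
      exact ih (List.nodup_cons.1 hnd).2 (fun y hy => hin y (List.mem_cons_of_mem _ hy)) vis rest hd
-- ---------- the BFS loop invariant and its preservation ----------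
lemma pv_foldl_chk {γ : Type} (rows cols r c : ℕ) (g : γ → ℕ × ℕ → γ) :
    ∀ (l : List (Int × Int)) (init : γ),
      l.foldl (fun s d => match pvChk rows cols r c d with
        | some n => g s n
        | none => s) init
      = (l.filterMap (pvChk rows cols r c)).foldl g init := by
  intro l
  induction l with
  | nil => intro init; rfl
  | cons d t ih =>
    intro init
    rw [List.foldl_cons, List.filterMap_cons]
    cases hc : pvChk rows cols r c d with
    | none => simp only [hc]; exact ih init
    | some n => simp only [hc]; rw [List.foldl_cons]; exact ih (g init n)

structure PvBfsInv (rows cols : ℕ) (ok : ℕ → ℕ → Bool) (Blk R : ℕ × ℕ → Prop)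
    (vis : List (List Bool)) (q acc : List (ℕ × ℕ)) : Prop where
  dims : pvDims rows cols vis
  qnd : q.Nodup
  accnd : acc.Nodup
  qacc : ∀ p ∈ q, p ∉ acc
  qok : ∀ p ∈ q, pvInB rows cols p ∧ ok p.1 p.2 = true
  accin : ∀ p ∈ acc, pvInB rows cols p
  visiff : ∀ p, pvVis vis p ↔ (Blk p ∨ p ∈ acc ∨ p ∈ q)
  closed : ∀ p ∈ acc, ∀ n ∈ pvNbrs rows cols p.1 p.2, ok n.1 n.2 = true → pvVis vis n
  qR : ∀ p ∈ q, R p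
  accR : ∀ p ∈ acc, R p

theorem pvBfs_run (rows cols : ℕ) (ok : ℕ → ℕ → Bool) (Blk R : ℕ × ℕ → Prop)
    (hR : ∀ p n, R p → n ∈ pvNbrs rows cols p.1 p.2 → ok n.1 n.2 = true → ¬ Blk n → R n) :
    ∀ (fuel : ℕ) (vis : List (List Bool)) (q acc : List (ℕ × ℕ)),
      PvBfsInv rows cols ok Blk R vis q acc → q.length + pvUnvis rows cols vis ≤ fuel →
      PvBfsInv rows cols ok Blk R (pvBfs rows cols ok fuel vis q acc).1 []
          (pvBfs rows cols ok fuel vis q acc).2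
        ∧ (∀ p, p ∈ acc ∨ p ∈ q → p ∈ (pvBfs rows cols ok fuel vis q acc).2) := by
  intro fuel
  induction fuel with
  | zero =>
    intro vis q acc hInv hf
    have hq : q = [] := List.length_eq_zero_iff.1 (by omega)
    subst hq
    refine ⟨hInv, fun p hp => ?_⟩
    simp only [pvBfs]
    rcases hp with hp | hp
    · exact hp
    · cases hp
  | succ fuel ih =>
    intro vis q acc hInv hf
    match q with
    | [] =>
      refine ⟨hInv, fun p hp => ?_⟩
      simp only [pvBfs]
      rcases hp with hp | hp
      · exact hp
      · cases hp
    | p :: rest =>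
      have hpq : p ∈ p :: rest := List.mem_cons_self
      have hpin := (hInv.qok p hpq).1
      have hpok := (hInv.qok p hpq).2
      have hnd := pvNbrs_nodup rows cols p.1 p.2
      have hLnd : ((pvNbrs rows cols p.1 p.2).filter
          (fun n => !pvMget vis n.1 n.2 && ok n.1 n.2)).Nodup := hnd.filter _
      set L := (pvNbrs rows cols p.1 p.2).filter
          (fun n => !pvMget vis n.1 n.2 && ok n.1 n.2) with hL
      have hLprop : ∀ x ∈ L, x ∈ pvNbrs rows cols p.1 p.2 ∧ pvMget vis x.1 x.2 = false ∧
          ok x.1 x.2 = true := by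
        intro x hx
        rw [hL, List.mem_filter] at hx
        refine ⟨hx.1, ?_, ?_⟩
        · have := hx.2
          simp only [Bool.and_eq_true, Bool.not_eq_eq_eq_not, Bool.not_true] at this
          exact this.1
        · have := hx.2
          simp only [Bool.and_eq_true] at this
          exact this.2
      have hLin : ∀ x ∈ L, pvInB rows cols x := fun x hx => pvNbrs_inB (hLprop x hx).1
      have hstep : pvBfs rows cols ok (fuel + 1) vis (p :: rest) acc
          = pvBfs rows cols ok fuel (pvMarkAll vis L) (rest ++ L) (acc ++ [p]) := by
        show (let s := pvDirs.foldl _ (vis, rest); pvBfs rows cols ok fuel s.1 s.2 (acc ++ [p])) = _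
        rw [pv_foldl_chk rows cols p.1 p.2
          (fun (s : List (List Bool) × List (ℕ × ℕ)) n =>
            if pvMget s.1 n.1 n.2 = false ∧ ok n.1 n.2 then
              (pvMset s.1 n.1 n.2, s.2 ++ [n]) else s) pvDirs (vis, rest),
          show pvDirs.filterMap (pvChk rows cols p.1 p.2) = pvNbrs rows cols p.1 p.2 from rfl]
        rw [pvBfs_fold rows cols ok p _ hnd (fun x hx => pvNbrs_inB hx) vis rest hInv.dims]
      rw [hstep]
      -- measure bookkeeping
      have hLun : ∀ x ∈ L, pvMget vis x.1 x.2 = false := fun x hx => (hLprop x hx).2.1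
      have hcount := pvUnvis_markAll hInv.dims hLnd hLin hLun
      have hvis' := pvVis_markAll hLin hInv.dims
      -- the new invariant
      have hviss : ∀ x, pvVis vis x ↔ (Blk x ∨ x ∈ acc ∨ x ∈ p :: rest) := hInv.visiff
      have hLnotvis : ∀ x ∈ L, ¬ pvVis vis x := by
        intro x hx hv
        rw [pvVis] at hv
        rw [hLun x hx] at hv
        cases hv
      have hrest_vis : ∀ x ∈ rest, pvVis vis x := by
        intro x hx
        exact (hviss x).2 (Or.inr (Or.inr (List.mem_cons_of_mem _ hx)))
      have hacc_vis : ∀ x ∈ acc, pvVis vis x := by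
        intro x hx
        exact (hviss x).2 (Or.inr (Or.inl hx))
      have hp_vis : pvVis vis p := (hviss p).2 (Or.inr (Or.inr hpq))
      have hInv' : PvBfsInv rows cols ok Blk R (pvMarkAll vis L) (rest ++ L) (acc ++ [p]) := by
        refine ⟨pvMarkAll_dims hInv.dims, ?_, ?_, ?_, ?_, ?_, ?_, ?_, ?_, ?_⟩
        · -- q nodup
          refine List.Nodup.append ((List.nodup_cons.1 hInv.qnd).2) hLnd ?_
          intro x hx hx'
          exact hLnotvis x hx' (hrest_vis x hx)
        · -- acc nodup
          refine List.Nodup.append hInv.accnd (List.nodup_singleton p) ?_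
          intro x hx hx'
          rw [List.mem_singleton] at hx'
          subst hx'
          exact hInv.qacc _ hpq hx
        · -- q ∩ acc' = ∅
          intro x hx hx'
          rcases List.mem_append.1 hx' with h' | h'
          · rcases List.mem_append.1 hx with h'' | h''
            · exact hInv.qacc x (List.mem_cons_of_mem _ h'') h'
            · exact hLnotvis x h'' (hacc_vis x h')
          · rw [List.mem_singleton] at h'
            subst h'
            rcases List.mem_append.1 hx with h'' | h''
            · exact (List.nodup_cons.1 hInv.qnd).1 h''
            · exact hLnotvis x h'' hp_vis
        · -- q ok
          intro x hx
          rcases List.mem_append.1 hx with h' | h'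
          · exact hInv.qok x (List.mem_cons_of_mem _ h')
          · exact ⟨hLin x h', (hLprop x h').2.2⟩
        · -- acc in bounds
          intro x hx
          rcases List.mem_append.1 hx with h' | h'
          · exact hInv.accin x h'
          · rw [List.mem_singleton] at h'
            subst h'
            exact hpin
        · -- visiff
          intro x
          rw [hvis' x, hviss x]
          simp only [List.mem_append, List.mem_singleton, List.mem_cons]
          tauto
        · -- closed
          intro x hx n hn hok
          rcases List.mem_append.1 hx with h' | h'
          · exact (hvis' n).2 (Or.inr (hInv.closed x h' n hn hok))
          · rw [List.mem_singleton] at h'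
            subst h'
            by_cases hv : pvVis vis n
            · exact (hvis' n).2 (Or.inr hv)
            · refine (hvis' n).2 (Or.inl ?_)
              rw [hL, List.mem_filter]
              refine ⟨hn, ?_⟩
              simp only [Bool.and_eq_true, Bool.not_eq_eq_eq_not, Bool.not_true]
              refine ⟨?_, hok⟩
              rw [pvVis] at hv
              exact Bool.not_eq_true _ ▸ (by simpa using hv)
        · -- q ⊆ R
          intro x hx
          rcases List.mem_append.1 hx with h' | h'
          · exact hInv.qR x (List.mem_cons_of_mem _ h')
          · refine hR p x (hInv.qR p hpq) (hLprop x h').1 (hLprop x h').2.2 ?_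
            intro hBlk
            exact hLnotvis x h' ((hviss x).2 (Or.inl hBlk))
        · -- acc ⊆ R
          intro x hx
          rcases List.mem_append.1 hx with h' | h'
          · exact hInv.accR x h'
          · rw [List.mem_singleton] at h'
            subst h'
            exact hInv.qR _ hpq
      have hf' : (rest ++ L).length + pvUnvis rows cols (pvMarkAll vis L) ≤ fuel := by
        rw [List.length_append]
        simp only [List.length_cons] at hf
        omega
      obtain ⟨hI, hmem⟩ := ih (pvMarkAll vis L) (rest ++ L) (acc ++ [p]) hInv' hf'
      refine ⟨hI, fun x hx => ?_⟩
      apply hmem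
      rcases hx with hx | hx
      · exact Or.inl (List.mem_append.2 (Or.inl hx))
      · rcases List.mem_cons.1 hx with rfl | hx'
        · exact Or.inl (List.mem_append.2 (Or.inr List.mem_cons_self))
        · exact Or.inr (List.mem_append.2 (Or.inl hx'))
-- ---------- generic bounded iteration to a fixpoint ----------
lemma bLoop_fix {α : Type} [DecidableEq α] (f : α → α) (μ : α → ℕ) (Inv : α → Prop)
    (hInv : ∀ x, Inv x → Inv (f x))
    (hdec : ∀ x, Inv x → f x ≠ x → μ (f x) < μ x) :
    ∀ (fuel : ℕ) (x : α), Inv x → μ x < fuel →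
      f (bLoop f fuel x) = bLoop f fuel x ∧ Inv (bLoop f fuel x) ∧
      ∃ k, bLoop f fuel x = f^[k] x := by
  intro fuel
  induction fuel with
  | zero => intro x _ h; omega
  | succ fuel ih =>
    intro x hx hμ
    simp only [bLoop]
    by_cases hfx : f x = x
    · simp only [if_pos hfx]
      exact ⟨hfx, hx, 0, rfl⟩
    · simp only [if_neg hfx]
      obtain ⟨h1, h2, k, h3⟩ := ih (f x) (hInv x hx) (by have := hdec x hx hfx; omega)
      exact ⟨h1, h2, k + 1, by rw [h3, Function.iterate_succ_apply]⟩

lemma pv_filter_length_le {α : Type} {f g : α → Bool} :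
    ∀ (l : List α), (∀ y ∈ l, g y = true → f y = true) →
      (l.filter g).length ≤ (l.filter f).length := by
  intro l
  induction l with
  | nil => intro _; simp
  | cons a t ih =>
    intro h
    have ht := ih (fun y hy hgy => h y (List.mem_cons_of_mem _ hy) hgy)
    rw [List.filter_cons, List.filter_cons]
    by_cases hga : g a = true
    · rw [if_pos hga, if_pos (h a List.mem_cons_self hga)]
      simpa using ht
    · rw [if_neg hga]
      split_ifs with hfa
      · simp only [List.length_cons]
        omega
      · exact ht

lemma pv_filter_length_lt {α : Type} {l : List α} {f g : α → Bool}
    (hfg : ∀ y ∈ l, g y = true → f y = true) {x : α} (hx : x ∈ l)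
    (hfx : f x = true) (hgx : g x = false) : (l.filter g).length < (l.filter f).length := by
  induction l with
  | nil => cases hx
  | cons a t ih =>
    have hmono := pv_filter_length_le t (fun y hy h =>
      hfg y (List.mem_cons_of_mem _ hy) h)
    rcases List.mem_cons.1 hx with rfl | hx'
    · rw [List.filter_cons, List.filter_cons, hfx, hgx, if_pos rfl, if_neg (by simp)]
      simp only [List.length_cons]
      omega
    · have := ih (fun y hy h => hfg y (List.mem_cons_of_mem _ hy) h) hx'
      rw [List.filter_cons, List.filter_cons]
      by_cases ha : f a = true
      · rw [if_pos ha]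
        by_cases hga : g a = true
        · rw [if_pos hga]
          simpa using this
        · rw [if_neg hga]
          simp only [List.length_cons]
          omega
      · rw [if_neg ha, if_neg (fun h => ha (hfg a List.mem_cons_self h))]
        exact this

lemma pv_sum_lt {α : Type} {l : List α} {f g : α → ℕ}
    (hfg : ∀ y ∈ l, f y ≤ g y) {x : α} (hx : x ∈ l) (hlt : f x < g x) :
    (l.map f).sum < (l.map g).sum := by
  induction l with
  | nil => cases hx
  | cons a t ih =>
    have hmono : (t.map f).sum ≤ (t.map g).sum :=
      List.sum_le_sum (fun y hy => hfg y (List.mem_cons_of_mem _ hy))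
    rcases List.mem_cons.1 hx with rfl | hx'
    · simp only [List.map_cons, List.sum_cons]
      omega
    · have := ih (fun y hy => hfg y (List.mem_cons_of_mem _ hy)) hx'
      have := hfg a List.mem_cons_self
      simp only [List.map_cons, List.sum_cons]
      omega

-- ---------- matrix extensionality ----------
lemma pvMget_row {m : List (List Bool)} {r : ℕ} (hr : r < m.length) :
    m.getD r [] = m[r] := List.getD_eq_getElem m [] hr

lemma pvMatrix_ext {rows cols : ℕ} {m m' : List (List Bool)}
    (h : pvDims rows cols m) (h' : pvDims rows cols m')
    (hp : ∀ p, pvInB rows cols p → pvMget m p.1 p.2 = pvMget m' p.1 p.2) : m = m' := by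
  obtain ⟨h1, h2⟩ := h
  obtain ⟨h1', h2'⟩ := h'
  apply List.ext_getElem (by omega)
  intro r hr hr'
  have hrow : m[r].length = cols := h2 _ (List.getElem_mem hr)
  have hrow' : m'[r].length = cols := h2' _ (List.getElem_mem hr')
  apply List.ext_getElem (by omega)
  intro c hc hc'
  have := hp (r, c) ⟨by omega, by omega⟩
  unfold pvMget at this
  rwa [pvMget_row (by omega), pvMget_row (by omega),
    List.getD_eq_getElem _ _ (by omega), List.getD_eq_getElem _ _ (by omega)] at this

-- ---------- outside: saturation computes border reachability ----------
def pvSeedO (grid : List (List Int)) (rows cols : ℕ) (p : ℕ × ℕ) : Prop :=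
  pvInB rows cols p ∧ pvGv grid p.1 p.2 ≠ 5 ∧
    (p.1 = 0 ∨ p.1 = rows - 1 ∨ p.2 = 0 ∨ p.2 = cols - 1)

def pvOut (grid : List (List Int)) (rows cols : ℕ) (p : ℕ × ℕ) : Prop :=
  pvReach rows cols (fun q => pvGv grid q.1 q.2 ≠ 5) (pvSeedO grid rows cols) p

lemma bSat_dims (grid : List (List Int)) (rows cols : ℕ) (out : List (List Bool)) :
    pvDims rows cols (bSat grid rows cols out) := by
  refine ⟨by simp [bSat], fun row hrow => ?_⟩
  simp only [bSat, List.mem_map] at hrow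
  obtain ⟨r, _, hr⟩ := hrow
  rw [← hr]
  simp

lemma pv_getD_map_range {β : Type} (f : ℕ → β) (d : β) {n k : ℕ} (hk : k < n) :
    ((List.range n).map f).getD k d = f k := by
  rw [List.getD_eq_getElem _ _ (by simpa using hk)]
  simp

lemma bSat_get (grid : List (List Int)) (rows cols : ℕ) (out : List (List Bool))
    {p : ℕ × ℕ} (hp : pvInB rows cols p) :
    pvMget (bSat grid rows cols out) p.1 p.2 =
      (pvMget out p.1 p.2 || (!(pvGv grid p.1 p.2 == 5) &&
        (pvNbrs rows cols p.1 p.2).any fun n => pvMget out n.1 n.2)) := by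
  have h1 : pvMget (bSat grid rows cols out) p.1 p.2
      = ((bSat grid rows cols out).getD p.1 []).getD p.2 false := rfl
  rw [h1]
  unfold bSat
  rw [pv_getD_map_range _ [] hp.1, pv_getD_map_range _ false hp.2]
  simp only [bFlag_e, bCell_e, bNbrs_eq]

def pvSatInv (grid : List (List Int)) (rows cols : ℕ) (out : List (List Bool)) : Prop :=
  pvDims rows cols out ∧ (∀ p, pvVis out p → pvOut grid rows cols p) ∧
    (∀ p, pvSeedO grid rows cols p → pvVis out p)

lemma pvSatInv_step {grid : List (List Int)} {rows cols : ℕ} {out : List (List Bool)}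
    (h : pvSatInv grid rows cols out) : pvSatInv grid rows cols (bSat grid rows cols out) := by
  obtain ⟨hd, hfwd, hseed⟩ := h
  refine ⟨bSat_dims grid rows cols out, ?_, ?_⟩
  · intro p hp
    by_cases hin : pvInB rows cols p
    · rw [pvVis, bSat_get grid rows cols out hin] at hp
      rcases Bool.or_eq_true_iff.1 hp with h' | h'
      · exact hfwd p h'
      · rcases Bool.and_eq_true_iff.1 h' with ⟨h5, hany⟩
        obtain ⟨n, hn, hvn⟩ := List.any_eq_true.1 hany
        refine pvReach.step n p (hfwd n hvn) (pvNbrs_symm hin hn) ?_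
        intro hg
        rw [hg] at h5
        simp at h5
    · rw [pvVis, pvMget_oob (bSat_dims grid rows cols out) hin] at hp
      cases hp
  · intro p hp
    have hin := hp.1
    rw [pvVis, bSat_get grid rows cols out hin]
    have := hseed p hp
    rw [pvVis] at this
    rw [this]
    rfl

lemma pvSat_fix_char {grid : List (List Int)} {rows cols : ℕ} {out : List (List Bool)}
    (hfix : bSat grid rows cols out = out) (h : pvSatInv grid rows cols out) :
    ∀ p, pvVis out p ↔ pvOut grid rows cols p := by
  obtain ⟨hd, hfwd, hseed⟩ := h
  intro p
  refine ⟨hfwd p, fun hr => ?_⟩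
  induction hr with
  | base p hp => exact hseed p hp
  | step p q hr hn hq ih =>
    have hqin := pvNbrs_inB hn
    have : pvMget (bSat grid rows cols out) q.1 q.2 = true := by
      rw [bSat_get grid rows cols out hqin]
      have hpin : pvInB rows cols p := by
        cases hr with
        | base _ hp => exact hp.1
        | step _ _ _ hn' _ => exact pvNbrs_inB hn'
      have hmem : p ∈ pvNbrs rows cols q.1 q.2 := pvNbrs_symm hpin hn
      have hany : (pvNbrs rows cols q.1 q.2).any (fun n => pvMget out n.1 n.2) = true :=
        List.any_eq_true.2 ⟨p, hmem, ih⟩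
      rw [hany]
      have h5 : (pvGv grid q.1 q.2 == 5) = false := by
        simpa using hq
      rw [h5]
      simp
    rw [pvVis, ← hfix]
    exact this

lemma pvSat_run (grid : List (List Int)) (rows cols : ℕ) (out0 : List (List Bool))
    (h0 : pvSatInv grid rows cols out0) :
    ∀ p, pvVis (bLoop (bSat grid rows cols) (rows * cols + 1) out0) p ↔
      pvOut grid rows cols p := by
  have hμ : pvUnvis rows cols out0 < rows * cols + 1 := by
    have : pvUnvis rows cols out0 ≤ (pvCells rows cols).length := List.length_filter_le _ _
    have hlen : (pvCells rows cols).length = rows * cols := by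
      simp [pvCells, List.length_flatMap]
    omega
  have hdec : ∀ x, pvSatInv grid rows cols x → bSat grid rows cols x ≠ x →
      pvUnvis rows cols (bSat grid rows cols x) < pvUnvis rows cols x := by
    intro x hx hne
    have hdx := hx.1
    have hds := bSat_dims grid rows cols x
    have hmono : ∀ y ∈ pvCells rows cols,
        (fun p => !pvMget (bSat grid rows cols x) p.1 p.2) y = true →
        (fun p => !pvMget x p.1 p.2) y = true := by
      intro y hy h'
      simp only [Bool.not_eq_eq_eq_not, Bool.not_true] at h' ⊢
      by_contra hcon
      have hvy : pvMget x y.1 y.2 = true := by simpa using hcon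
      have : pvMget (bSat grid rows cols x) y.1 y.2 = true := by
        rw [bSat_get grid rows cols x (mem_pvCells.1 hy), hvy]
        rfl
      rw [this] at h'
      cases h'
    -- some in-bounds cell changed, necessarily false → true
    have hne' : ∃ p, pvInB rows cols p ∧ pvMget x p.1 p.2 = false ∧
        pvMget (bSat grid rows cols x) p.1 p.2 = true := by
      by_contra hcon
      push_neg at hcon
      apply hne
      apply pvMatrix_ext hds hdx
      intro p hp
      rw [bSat_get grid rows cols x hp]
      cases hvx : pvMget x p.1 p.2 with
      | true => rfl
      | false =>
        cases hvs : pvMget (bSat grid rows cols x) p.1 p.2 with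
        | false =>
          rw [bSat_get grid rows cols x hp, hvx] at hvs
          simpa using hvs
        | true => exact absurd hvs (by simpa using hcon p hp hvx)
    obtain ⟨p, hp, hfalse, htrue⟩ := hne'
    exact pv_filter_length_lt hmono (mem_pvCells.2 hp) (by simp [hfalse]) (by simp [htrue])
  obtain ⟨hfix, hinv, _⟩ := bLoop_fix (bSat grid rows cols) (pvUnvis rows cols)
    (pvSatInv grid rows cols) (fun x hx => pvSatInv_step hx) hdec (rows * cols + 1) out0 h0 hμ
  exact pvSat_fix_char hfix hinv
-- ---------- the pair order used by Python's min on (r, c) tuples ----------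
def pvLe (a b : ℕ × ℕ) : Prop := pvLeb a b = true

lemma pvLe_iff {a b : ℕ × ℕ} : pvLe a b ↔ (a.1 < b.1 ∨ (a.1 = b.1 ∧ a.2 ≤ b.2)) := by
  unfold pvLe pvLeb
  simp

lemma pvLe_refl (a : ℕ × ℕ) : pvLe a a := pvLe_iff.2 (Or.inr ⟨rfl, le_refl _⟩)

lemma pvLe_trans {a b c : ℕ × ℕ} (h1 : pvLe a b) (h2 : pvLe b c) : pvLe a c := by
  rw [pvLe_iff] at *
  omega

lemma pvLe_antisymm {a b : ℕ × ℕ} (h1 : pvLe a b) (h2 : pvLe b a) : a = b := by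
  rw [pvLe_iff] at *
  exact Prod.ext_iff.2 ⟨by omega, by omega⟩

lemma pvPmin_cases (a b : ℕ × ℕ) : pvPmin a b = a ∨ pvPmin a b = b := by
  unfold pvPmin
  split_ifs <;> simp

lemma pvPmin_le_left (a b : ℕ × ℕ) : pvLe (pvPmin a b) a := by
  unfold pvPmin
  split_ifs with h
  · exact pvLe_refl a
  · rw [pvLe_iff]
    unfold pvLeb at h
    simp at h
    omega

lemma pvPmin_le_right (a b : ℕ × ℕ) : pvLe (pvPmin a b) b := by
  unfold pvPmin
  split_ifs with h
  · exact h
  · exact pvLe_refl b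

lemma pvFold_pmin_mem : ∀ (l : List (ℕ × ℕ)) (v : ℕ × ℕ),
    l.foldl pvPmin v = v ∨ l.foldl pvPmin v ∈ l := by
  intro l
  induction l with
  | nil => intro v; exact Or.inl rfl
  | cons a t ih =>
    intro v
    rw [List.foldl_cons]
    rcases ih (pvPmin v a) with h | h
    · rcases pvPmin_cases v a with h' | h'
      · exact Or.inl (h.trans h')
      · right
        rw [h, h']
        exact List.mem_cons_self
    · exact Or.inr (List.mem_cons_of_mem _ h)

lemma pvFold_pmin_le_init : ∀ (l : List (ℕ × ℕ)) (v : ℕ × ℕ), pvLe (l.foldl pvPmin v) v := by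
  intro l
  induction l with
  | nil => intro v; exact pvLe_refl v
  | cons a t ih =>
    intro v
    rw [List.foldl_cons]
    exact pvLe_trans (ih (pvPmin v a)) (pvPmin_le_left v a)

lemma pvFold_pmin_le_mem : ∀ (l : List (ℕ × ℕ)) (v w : ℕ × ℕ), w ∈ l →
    pvLe (l.foldl pvPmin v) w := by
  intro l
  induction l with
  | nil => intro v w h; cases h
  | cons a t ih =>
    intro v w hw
    rw [List.foldl_cons]
    rcases List.mem_cons.1 hw with rfl | hw'
    · exact pvLe_trans (pvFold_pmin_le_init t (pvPmin v w)) (pvPmin_le_right v w)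
    · exact ih (pvPmin v a) w hw'

-- ---------- connectivity along an edge relation ----------
inductive pvConn (rows cols : ℕ) (E : ℕ × ℕ → ℕ × ℕ → Prop) (s : ℕ × ℕ) : ℕ × ℕ → Prop
  | refl : pvConn rows cols E s s
  | step (p q : ℕ × ℕ) : pvConn rows cols E s p → q ∈ pvNbrs rows cols p.1 p.2 →
      E p q → pvConn rows cols E s q

lemma pvConn_inB {rows cols : ℕ} {E : ℕ × ℕ → ℕ × ℕ → Prop} {s p : ℕ × ℕ}
    (hs : pvInB rows cols s) (h : pvConn rows cols E s p) : pvInB rows cols p := by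
  induction h with
  | refl => exact hs
  | step p q _ hn _ _ => exact pvNbrs_inB hn

lemma pvConn_trans {rows cols : ℕ} {E : ℕ × ℕ → ℕ × ℕ → Prop} {s p q : ℕ × ℕ}
    (h1 : pvConn rows cols E s p) (h2 : pvConn rows cols E p q) : pvConn rows cols E s q := by
  induction h2 with
  | refl => exact h1
  | step a b hc hn hE ih => exact .step a b ih hn hE

lemma pvConn_symm {rows cols : ℕ} {E : ℕ × ℕ → ℕ × ℕ → Prop}
    (hsym : ∀ a b, E a b → E b a) {s p : ℕ × ℕ} (hs : pvInB rows cols s)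
    (h : pvConn rows cols E s p) : pvConn rows cols E p s := by
  induction h with
  | refl => exact .refl
  | step a b hc hn hE ih =>
    refine pvConn_trans ?_ ih
    exact .step b a .refl (pvNbrs_symm (pvConn_inB hs hc) hn) (hsym a b hE)

-- ---------- option matrices ----------
def pvLDims (rows cols : ℕ) (m : List (List (Option (ℕ × ℕ)))) : Prop :=
  m.length = rows ∧ ∀ row ∈ m, row.length = cols

lemma pvLget_oob {rows cols : ℕ} {m : List (List (Option (ℕ × ℕ)))} (h : pvLDims rows cols m)
    {p : ℕ × ℕ} (hp : ¬ pvInB rows cols p) : pvLget m p.1 p.2 = none := by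
  obtain ⟨h1, h2⟩ := h
  unfold pvInB at hp
  push_neg at hp
  unfold pvLget
  by_cases hr : p.1 < m.length
  · have hrow : (m.getD p.1 []).length = cols := by
      have : m.getD p.1 [] ∈ m := by
        rw [List.getD_eq_getElem _ _ hr]; exact List.getElem_mem hr
      exact h2 _ this
    exact List.getD_eq_default _ _ (by omega)
  · rw [show m.getD p.1 [] = [] from List.getD_eq_default _ _ (by omega)]
    simp

lemma pvLMatrix_ext {rows cols : ℕ} {m m' : List (List (Option (ℕ × ℕ)))}
    (h : pvLDims rows cols m) (h' : pvLDims rows cols m')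
    (hp : ∀ p, pvInB rows cols p → pvLget m p.1 p.2 = pvLget m' p.1 p.2) : m = m' := by
  obtain ⟨h1, h2⟩ := h
  obtain ⟨h1', h2'⟩ := h'
  apply List.ext_getElem (by omega)
  intro r hr hr'
  have hrow : m[r].length = cols := h2 _ (List.getElem_mem hr)
  have hrow' : m'[r].length = cols := h2' _ (List.getElem_mem hr')
  apply List.ext_getElem (by omega)
  intro c hc hc'
  have := hp (r, c) ⟨by omega, by omega⟩
  unfold pvLget at this
  rwa [List.getD_eq_getElem m [] (by omega), List.getD_eq_getElem m' [] (by omega),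
    List.getD_eq_getElem _ _ (by omega), List.getD_eq_getElem _ _ (by omega)] at this

-- candidate labels collected from linked neighbours
def pvCands (rows cols : ℕ) (linked : ℕ → ℕ → ℕ → ℕ → Bool)
    (lab : List (List (Option (ℕ × ℕ)))) (p : ℕ × ℕ) : List (ℕ × ℕ) :=
  (pvNbrs rows cols p.1 p.2).filterMap (fun q =>
    match pvLget lab q.1 q.2 with
    | some w => if linked p.1 p.2 q.1 q.2 then some w else none
    | none => none)

lemma bLabStep_dims (rows cols : ℕ) (linked : ℕ → ℕ → ℕ → ℕ → Bool)
    (lab : List (List (Option (ℕ × ℕ)))) :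
    pvLDims rows cols (bLabStep rows cols linked lab) := by
  refine ⟨by simp [bLabStep], fun row hrow => ?_⟩
  simp only [bLabStep, List.mem_map] at hrow
  obtain ⟨r, _, hr⟩ := hrow
  rw [← hr]
  simp

lemma bLabStep_get (rows cols : ℕ) (linked : ℕ → ℕ → ℕ → ℕ → Bool)
    (lab : List (List (Option (ℕ × ℕ)))) {p : ℕ × ℕ} (hp : pvInB rows cols p) :
    pvLget (bLabStep rows cols linked lab) p.1 p.2 =
      match pvLget lab p.1 p.2 with
      | none => none
      | some v => some ((pvCands rows cols linked lab p).foldl pvPmin v) := by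
  have h1 : pvLget (bLabStep rows cols linked lab) p.1 p.2
      = ((bLabStep rows cols linked lab).getD p.1 []).getD p.2 none := rfl
  rw [h1]
  unfold bLabStep
  rw [pv_getD_map_range _ [] hp.1, pv_getD_map_range _ none hp.2]
  simp only [bGetL_e, bMin_fun, bNbrs_eq]
  rfl

def pvLabE (elig : ℕ → ℕ → Bool) (linked : ℕ → ℕ → ℕ → ℕ → Bool) (p q : ℕ × ℕ) : Prop :=
  elig p.1 p.2 = true ∧ elig q.1 q.2 = true ∧ linked p.1 p.2 q.1 q.2 = true

def pvLabInv (rows cols : ℕ) (elig : ℕ → ℕ → Bool) (linked : ℕ → ℕ → ℕ → ℕ → Bool)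
    (lab : List (List (Option (ℕ × ℕ)))) : Prop :=
  pvLDims rows cols lab ∧
  (∀ p, pvInB rows cols p → ((pvLget lab p.1 p.2).isSome ↔ elig p.1 p.2 = true)) ∧
  (∀ p v, pvInB rows cols p → pvLget lab p.1 p.2 = some v →
    pvConn rows cols (pvLabE elig linked) p v ∧ pvLe v p)

lemma pvCands_spec {rows cols : ℕ} {elig : ℕ → ℕ → Bool} {linked : ℕ → ℕ → ℕ → ℕ → Bool}
    {lab : List (List (Option (ℕ × ℕ)))} (hInv : pvLabInv rows cols elig linked lab)
    {p : ℕ × ℕ} (hp : pvInB rows cols p) (hep : elig p.1 p.2 = true) :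
    ∀ w ∈ pvCands rows cols linked lab p,
      pvConn rows cols (pvLabE elig linked) p w := by
  obtain ⟨hd, hsome, hval⟩ := hInv
  intro w hw
  obtain ⟨q, hqn, hq⟩ := List.mem_filterMap.1 hw
  have hqin : pvInB rows cols q := pvNbrs_inB hqn
  cases hlq : pvLget lab q.1 q.2 with
  | none => rw [hlq] at hq; cases hq
  | some w' =>
    rw [hlq] at hq
    have hq' : (if linked p.1 p.2 q.1 q.2 = true then some w' else none) = some w := hq
    by_cases hl : linked p.1 p.2 q.1 q.2 = true
    · rw [if_pos hl] at hq'
      obtain rfl : w' = w := by injection hq' 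
      have heq : elig q.1 q.2 = true := (hsome q hqin).1 (by simp [hlq])
      have hconnpq : pvConn rows cols (pvLabE elig linked) p q :=
        .step p q .refl hqn ⟨hep, heq, hl⟩
      exact pvConn_trans hconnpq (hval q _ hqin hlq).1
    · rw [if_neg hl] at hq'
      cases hq' 

lemma pvLabInv_step {rows cols : ℕ} {elig : ℕ → ℕ → Bool} {linked : ℕ → ℕ → ℕ → ℕ → Bool}
    {lab : List (List (Option (ℕ × ℕ)))} (hInv : pvLabInv rows cols elig linked lab) :
    pvLabInv rows cols elig linked (bLabStep rows cols linked lab) := by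
  obtain ⟨hd, hsome, hval⟩ := hInv
  refine ⟨bLabStep_dims rows cols linked lab, ?_, ?_⟩
  · intro p hp
    rw [bLabStep_get rows cols linked lab hp]
    cases hl : pvLget lab p.1 p.2 with
    | none =>
      have := hsome p hp
      rw [hl] at this
      simpa using this
    | some v =>
      have := hsome p hp
      rw [hl] at this
      simpa using this
  · intro p v hp hv
    rw [bLabStep_get rows cols linked lab hp] at hv
    cases hl : pvLget lab p.1 p.2 with
    | none => rw [hl] at hv; cases hv
    | some v0 =>
      rw [hl] at hv
      obtain rfl : (pvCands rows cols linked lab p).foldl pvPmin v0 = v := by injection hv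
      have hep : elig p.1 p.2 = true := (hsome p hp).1 (by simp [hl])
      have hv0 := hval p v0 hp hl
      constructor
      · rcases pvFold_pmin_mem (pvCands rows cols linked lab p) v0 with h | h
        · rw [h]; exact hv0.1
        · exact pvCands_spec ⟨hd, hsome, hval⟩ hp hep _ h
      · exact pvLe_trans (pvFold_pmin_le_init _ v0) hv0.2

-- encoding for the termination measure
def pvEncL (cols : ℕ) (o : Option (ℕ × ℕ)) : ℕ :=
  match o with
  | none => 0
  | some v => v.1 * cols + v.2

def pvLMeasure (rows cols : ℕ) (lab : List (List (Option (ℕ × ℕ)))) : ℕ :=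
  ((pvCells rows cols).map (fun p => pvEncL cols (pvLget lab p.1 p.2))).sum

lemma pvEncL_mono {cols : ℕ} {a b : ℕ × ℕ} (h : pvLe a b) (ha : a.2 < cols) :
    pvEncL cols (some a) ≤ pvEncL cols (some b) := by
  rcases pvLe_iff.1 h with h' | h'
  · have h2 : a.1 * cols + cols ≤ b.1 * cols := by
      calc a.1 * cols + cols = (a.1 + 1) * cols := by ring
      _ ≤ b.1 * cols := Nat.mul_le_mul_right cols (by omega)
    simp only [pvEncL]
    omega
  · simp only [pvEncL]
    rw [h'.1]
    omega

lemma pvEncL_strict {cols : ℕ} {a b : ℕ × ℕ} (h : pvLe a b) (hne : a ≠ b) (ha : a.2 < cols) :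
    pvEncL cols (some a) < pvEncL cols (some b) := by
  rcases pvLe_iff.1 h with h' | h'
  · have h2 : a.1 * cols + cols ≤ b.1 * cols := by
      calc a.1 * cols + cols = (a.1 + 1) * cols := by ring
      _ ≤ b.1 * cols := Nat.mul_le_mul_right cols (by omega)
    simp only [pvEncL]
    omega
  · have h3 : a.2 < b.2 := by
      rcases Nat.lt_or_ge a.2 b.2 with h'' | h''
      · exact h''
      · exact absurd (Prod.ext_iff.2 ⟨h'.1, by omega⟩) hne
    simp only [pvEncL]
    rw [h'.1]
    omega

lemma pvLab_decrease {rows cols : ℕ} {elig : ℕ → ℕ → Bool} {linked : ℕ → ℕ → ℕ → ℕ → Bool}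
    {lab : List (List (Option (ℕ × ℕ)))} (hInv : pvLabInv rows cols elig linked lab)
    (hne : bLabStep rows cols linked lab ≠ lab) :
    pvLMeasure rows cols (bLabStep rows cols linked lab) < pvLMeasure rows cols lab := by
  have hInv' := pvLabInv_step hInv
  obtain ⟨hd, hsome, hval⟩ := hInv
  obtain ⟨hd', hsome', hval'⟩ := hInv'
  -- pointwise: the new label is pvLe-below the old one
  have hpt : ∀ p, pvInB rows cols p →
      pvEncL cols (pvLget (bLabStep rows cols linked lab) p.1 p.2) ≤
        pvEncL cols (pvLget lab p.1 p.2) := by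
    intro p hp
    rw [bLabStep_get rows cols linked lab hp]
    cases hl : pvLget lab p.1 p.2 with
    | none => exact le_refl _
    | some v0 =>
      have hle := pvFold_pmin_le_init (pvCands rows cols linked lab p) v0
      have hnew : pvLget (bLabStep rows cols linked lab) p.1 p.2
          = some ((pvCands rows cols linked lab p).foldl pvPmin v0) := by
        rw [bLabStep_get rows cols linked lab hp, hl]
      have hin := (hval' p _ hp hnew).1
      have hvin : pvInB rows cols ((pvCands rows cols linked lab p).foldl pvPmin v0) :=
        pvConn_inB hp hin
      exact pvEncL_mono hle hvin.2
  -- some in-bounds cell strictly drops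
  have hx : ∃ p, pvInB rows cols p ∧
      pvEncL cols (pvLget (bLabStep rows cols linked lab) p.1 p.2) <
        pvEncL cols (pvLget lab p.1 p.2) := by
    by_contra hcon
    push_neg at hcon
    apply hne
    apply pvLMatrix_ext (bLabStep_dims rows cols linked lab) ⟨hd.1, hd.2⟩
    intro p hp
    rw [bLabStep_get rows cols linked lab hp]
    cases hl : pvLget lab p.1 p.2 with
    | none => rfl
    | some v0 =>
      have hnew : pvLget (bLabStep rows cols linked lab) p.1 p.2
          = some ((pvCands rows cols linked lab p).foldl pvPmin v0) := by
        rw [bLabStep_get rows cols linked lab hp, hl]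
      have hle := pvFold_pmin_le_init (pvCands rows cols linked lab p) v0
      have hvin : pvInB rows cols ((pvCands rows cols linked lab p).foldl pvPmin v0) :=
        pvConn_inB hp (hval' p _ hp hnew).1
      have := hcon p hp
      rw [hnew, hl] at this
      by_cases heq : (pvCands rows cols linked lab p).foldl pvPmin v0 = v0
      · exact congrArg some heq
      · exact absurd (pvEncL_strict hle heq hvin.2) (by omega)
  obtain ⟨p, hp, hlt⟩ := hx
  exact pv_sum_lt (fun y hy => hpt y (mem_pvCells.1 hy)) (mem_pvCells.2 hp) hlt

-- the characterisation of the converged labelling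
def pvLabSpec (rows cols : ℕ) (elig : ℕ → ℕ → Bool) (linked : ℕ → ℕ → ℕ → ℕ → Bool)
    (lab : List (List (Option (ℕ × ℕ)))) : Prop :=
  (∀ p, pvInB rows cols p → ¬ elig p.1 p.2 = true → pvLget lab p.1 p.2 = none) ∧
  (∀ p, pvInB rows cols p → elig p.1 p.2 = true → ∃ v, pvLget lab p.1 p.2 = some v ∧
    pvConn rows cols (pvLabE elig linked) p v ∧
    (∀ q, pvConn rows cols (pvLabE elig linked) p q → pvLe v q))

lemma pvLab_fix_char {rows cols : ℕ} {elig : ℕ → ℕ → Bool} {linked : ℕ → ℕ → ℕ → ℕ → Bool}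
    {lab : List (List (Option (ℕ × ℕ)))}
    (hsym : ∀ a b, pvLabE elig linked a b → pvLabE elig linked b a)
    (hfix : bLabStep rows cols linked lab = lab) (hInv : pvLabInv rows cols elig linked lab) :
    pvLabSpec rows cols elig linked lab := by
  obtain ⟨hd, hsome, hval⟩ := hInv
  -- value at p is pvLe-below the value at any linked neighbour
  have hedge : ∀ p q v w, pvInB rows cols p → q ∈ pvNbrs rows cols p.1 p.2 →
      pvLget lab p.1 p.2 = some v → pvLget lab q.1 q.2 = some w →
      linked p.1 p.2 q.1 q.2 = true → pvLe v w := by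
    intro p q v w hp hqn hv hw hl
    have hfp : pvLget lab p.1 p.2 = some ((pvCands rows cols linked lab p).foldl pvPmin v) := by
      conv_lhs => rw [← hfix]
      rw [bLabStep_get rows cols linked lab hp, hv]
    have hwv : w ∈ pvCands rows cols linked lab p := by
      apply List.mem_filterMap.2
      refine ⟨q, hqn, ?_⟩
      rw [hw]
      show (if linked p.1 p.2 q.1 q.2 = true then some w else none) = some w
      rw [if_pos hl]
    have : some v = some ((pvCands rows cols linked lab p).foldl pvPmin v) := hv ▸ hfp
    obtain h : v = (pvCands rows cols linked lab p).foldl pvPmin v := by injection this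
    rw [h]
    exact pvFold_pmin_le_mem _ v w hwv
  -- the label is constant along connectivity
  have hconst : ∀ p q, pvInB rows cols p → pvConn rows cols (pvLabE elig linked) p q →
      pvLget lab p.1 p.2 = pvLget lab q.1 q.2 := by
    intro p q hp hconn
    induction hconn with
    | refl => rfl
    | step a b hc hn hE ih =>
      have hain : pvInB rows cols a := pvConn_inB hp hc
      have hbin : pvInB rows cols b := pvNbrs_inB hn
      have ha : elig a.1 a.2 = true := hE.1
      have hb : elig b.1 b.2 = true := hE.2.1
      obtain ⟨va, hva⟩ := Option.isSome_iff_exists.1 ((hsome a hain).2 ha)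
      obtain ⟨vb, hvb⟩ := Option.isSome_iff_exists.1 ((hsome b hbin).2 hb)
      have h1 : pvLe va vb := hedge a b va vb hain hn hva hvb hE.2.2
      have hE' := hsym a b hE
      have h2 : pvLe vb va := hedge b a vb va hbin (pvNbrs_symm hain hn) hvb hva hE'.2.2
      rw [ih, hva, hvb, pvLe_antisymm h1 h2]
  refine ⟨?_, ?_⟩
  · intro p hp hne
    have := hsome p hp
    cases hl : pvLget lab p.1 p.2 with
    | none => rfl
    | some v => exact absurd (this.1 (by simp [hl])) hne
  · intro p hp he
    obtain ⟨v, hv⟩ := Option.isSome_iff_exists.1 ((hsome p hp).2 he)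
    refine ⟨v, hv, (hval p v hp hv).1, ?_⟩
    intro q hq
    have hqin : pvInB rows cols q := pvConn_inB hp hq
    have : pvLget lab q.1 q.2 = some v := by
      rw [← hconst p q hp hq, hv]
    exact (hval q v hqin this).2

theorem bLabels_spec (rows cols : ℕ) (elig : ℕ → ℕ → Bool) (linked : ℕ → ℕ → ℕ → ℕ → Bool)
    (hsym : ∀ a b, pvLabE elig linked a b → pvLabE elig linked b a) :
    pvLabSpec rows cols elig linked (bLabels rows cols elig linked) ∧
      pvLDims rows cols (bLabels rows cols elig linked) := by
  set lab0 := (List.range rows).map (fun r => (List.range cols).map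
    (fun c => if elig r c then some (r, c) else none)) with hlab0
  have hd0 : pvLDims rows cols lab0 := by
    refine ⟨by simp [hlab0], fun row hrow => ?_⟩
    simp only [hlab0, List.mem_map] at hrow
    obtain ⟨r, _, hr⟩ := hrow
    rw [← hr]
    simp
  have hget0 : ∀ p, pvInB rows cols p →
      pvLget lab0 p.1 p.2 = if elig p.1 p.2 then some p else none := by
    intro p hp
    have h1 : pvLget lab0 p.1 p.2 = (lab0.getD p.1 []).getD p.2 none := rfl
    rw [h1, hlab0, pv_getD_map_range _ [] hp.1, pv_getD_map_range _ none hp.2]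
  have hInv0 : pvLabInv rows cols elig linked lab0 := by
    refine ⟨hd0, ?_, ?_⟩
    · intro p hp
      rw [hget0 p hp]
      split_ifs with h <;> simp [h]
    · intro p v hp hv
      rw [hget0 p hp] at hv
      split_ifs at hv with h
      obtain rfl : p = v := by injection hv
      exact ⟨.refl, pvLe_refl p⟩
  have hμ : pvLMeasure rows cols lab0 < rows * cols * (rows * cols) + 1 := by
    have hbound : ∀ x ∈ (pvCells rows cols).map (fun p => pvEncL cols (pvLget lab0 p.1 p.2)),
        x ≤ rows * cols := by
      intro x hx
      obtain ⟨p, hp, he⟩ := List.mem_map.1 hx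
      have hpin := mem_pvCells.1 hp
      rw [hget0 p hpin] at he
      split_ifs at he
      · rw [← he]
        simp only [pvEncL]
        obtain ⟨hp1, hp2⟩ := hpin
        have h2 : p.1 * cols + cols ≤ rows * cols := by
          calc p.1 * cols + cols = (p.1 + 1) * cols := by ring
          _ ≤ rows * cols := Nat.mul_le_mul_right cols (by omega)
        omega
      · rw [← he]
        simp [pvEncL]
    have := List.sum_le_card_nsmul _ _ hbound
    have hlen : ((pvCells rows cols).map
        (fun p => pvEncL cols (pvLget lab0 p.1 p.2))).length = rows * cols := by
      simp [pvCells, List.length_flatMap]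
    rw [hlen] at this
    have : pvLMeasure rows cols lab0 ≤ rows * cols * (rows * cols) := by
      simpa [pvLMeasure, smul_eq_mul] using this
    omega
  obtain ⟨hfix, hinv, _⟩ := bLoop_fix (bLabStep rows cols linked) (pvLMeasure rows cols)
    (pvLabInv rows cols elig linked) (fun x hx => pvLabInv_step hx)
    (fun x hx hne => pvLab_decrease hx hne) (rows * cols * (rows * cols) + 1) lab0 hInv0 hμ
  exact ⟨pvLab_fix_char hsym hfix hinv, hinv.1⟩
-- ---------- row-major order on cells ----------
def pvLt (a b : ℕ × ℕ) : Prop := pvLe a b ∧ a ≠ b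

lemma pvLt_iff {a b : ℕ × ℕ} : pvLt a b ↔ (a.1 < b.1 ∨ (a.1 = b.1 ∧ a.2 < b.2)) := by
  unfold pvLt
  rw [pvLe_iff, Ne, Prod.ext_iff]
  omega

lemma pvCells_pairwise (rows cols : ℕ) : List.Pairwise pvLt (pvCells rows cols) := by
  rw [pvCells, List.pairwise_flatMap]
  constructor
  · intro r _
    refine List.Pairwise.map _ ?_ (List.pairwise_lt_range (n := cols))
    intro c₁ c₂ h
    exact pvLt_iff.2 (Or.inr ⟨rfl, h⟩)
  · refine List.Pairwise.imp ?_ (List.pairwise_lt_range (n := rows))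
    intro r₁ r₂ hr x hx y hy
    simp only [List.mem_map] at hx hy
    obtain ⟨c₁, _, rfl⟩ := hx
    obtain ⟨c₂, _, rfl⟩ := hy
    exact pvLt_iff.2 (Or.inl hr)

lemma pvPrefix_closed {rows cols : ℕ} {pref suf : List (ℕ × ℕ)} {x : ℕ × ℕ}
    (hsplit : pvCells rows cols = pref ++ x :: suf) :
    (∀ q ∈ pref, pvLt q x) ∧ x ∉ pref ∧ pvInB rows cols x ∧
    (∀ q, pvInB rows cols q → pvLt q x → q ∈ pref) := by
  have hpw := pvCells_pairwise rows cols
  rw [hsplit] at hpw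
  have h1 : ∀ q ∈ pref, pvLt q x := by
    intro q hq
    have := (List.pairwise_append.1 hpw).2.2 q hq x List.mem_cons_self
    exact this
  have hnd : x ∉ pref := fun hx => (h1 x hx).2 rfl
  have hin : pvInB rows cols x := mem_pvCells.1 (by rw [hsplit]; simp)
  refine ⟨h1, hnd, hin, fun q hq hlt => ?_⟩
  have : q ∈ pref ++ x :: suf := by
    rw [← hsplit]
    exact mem_pvCells.2 hq
  rcases List.mem_append.1 this with h | h
  · exact h
  · rcases List.mem_cons.1 h with rfl | h'
    · exact absurd rfl hlt.2
    · exfalso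
      have := (List.pairwise_append.1 hpw).2.1
      have hxq : pvLt x q := by
        rcases List.pairwise_cons.1 this with ⟨hh, _⟩
        exact hh q h'
      rw [pvLt_iff] at hxq hlt
      omega

-- ---------- pvShape is a function of the cell set only ----------
lemma pv_min?_perm {l l' : List ℕ} (h : List.Perm l l') : l.min? = l'.min? := by
  cases hm : l.min? with
  | none =>
    rw [List.min?_eq_none_iff] at hm
    subst hm
    rw [← List.Perm.nil_eq h]
    rfl
  | some a =>
    rw [List.min?_eq_some_iff] at hm
    cases hm' : l'.min? with
    | none =>
      rw [List.min?_eq_none_iff] at hm'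
      subst hm'
      cases (List.Perm.mem_iff h).1 hm.1
    | some b =>
      rw [List.min?_eq_some_iff] at hm'
      have hab : a ≤ b := hm.2 b ((List.Perm.mem_iff h).2 hm'.1)
      have hba : b ≤ a := hm'.2 a ((List.Perm.mem_iff h).1 hm.1)
      rw [Nat.le_antisymm hab hba]

lemma pvShape_perm {l l' : List (ℕ × ℕ)} (h : List.Perm l l') : pvShape l = pvShape l' := by
  have hR : pvMinR l = pvMinR l' := by
    unfold pvMinR
    rw [pv_min?_perm (List.Perm.map Prod.fst h)]
  have hC : pvMinC l = pvMinC l' := by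
    unfold pvMinC
    rw [pv_min?_perm (List.Perm.map Prod.snd h)]
  unfold pvShape
  rw [hR, hC]
  have hperm : List.Perm ((l.map (fun p => (p.1 - pvMinR l', p.2 - pvMinC l'))).dedup)
      ((l'.map (fun p => (p.1 - pvMinR l', p.2 - pvMinC l'))).dedup) :=
    List.Perm.dedup (List.Perm.map _ h)
  have htrans : ∀ a b c : ℕ × ℕ, pvLeb a b = true → pvLeb b c = true → pvLeb a c = true :=
    fun a b c h1 h2 => pvLe_trans h1 h2
  have htotal : ∀ a b : ℕ × ℕ, (pvLeb a b || pvLeb b a) = true := by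
    intro a b
    have h1 : pvLeb a b = true ∨ pvLeb b a = true := by
      rcases Nat.lt_trichotomy a.1 b.1 with h | h | h
      · exact Or.inl (pvLe_iff.2 (Or.inl h))
      · rcases Nat.le_total a.2 b.2 with h' | h'
        · exact Or.inl (pvLe_iff.2 (Or.inr ⟨h, h'⟩))
        · exact Or.inr (pvLe_iff.2 (Or.inr ⟨h.symm, h'⟩))
      · exact Or.inr (pvLe_iff.2 (Or.inl h))
    rcases h1 with h1 | h1 <;> simp [h1]
  apply List.eq_of_perm_of_sorted (le := fun a b => pvLeb a b = true)
    (fun a b _ _ h1 h2 => pvLe_antisymm h1 h2)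
  · exact List.sorted_mergeSort htrans htotal _
  · exact List.sorted_mergeSort htrans htotal _
  · exact List.Perm.trans (List.mergeSort_perm _ _)
      (List.Perm.trans hperm (List.Perm.symm (List.mergeSort_perm _ _)))

-- ---------- integer matrices (the output grid) ----------
def pvIget (m : List (List Int)) (r c : ℕ) : Int := (m.getD r []).getD c 0

lemma pvSetI_length (m : List (List Int)) (r c : ℕ) (v : Int) :
    (pvSetI m r c v).length = m.length := by simp [pvSetI]

lemma pvSetI_rowlen (m : List (List Int)) (r c : ℕ) (v : Int) (i : ℕ) :
    ((pvSetI m r c v).getD i []).length = (m.getD i []).length := by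
  by_cases hr : r < m.length
  · by_cases hir : i = r
    · subst hir
      unfold pvSetI
      rw [List.getD_eq_getElem _ _ (by simpa using hr), List.getElem_set_self, List.length_set]
    · unfold pvSetI
      simp [List.getD_eq_getElem?_getD, List.getElem?_set_ne (fun h => hir h.symm)]
  · unfold pvSetI
    rw [List.set_eq_of_length_le (by omega)]

lemma pvIget_setI {m : List (List Int)} {r c : ℕ} (hr : r < m.length)
    (hc : c < (m.getD r []).length) (v : Int) (a b : ℕ) :
    pvIget (pvSetI m r c v) a b = if a = r ∧ b = c then v else pvIget m a b := by
  have e1 : (pvSetI m r c v).getD r [] = (m.getD r []).set c v := by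
    unfold pvSetI
    rw [List.getD_eq_getElem _ _ (by simpa using hr), List.getElem_set_self]
  have e2 : ∀ a, a ≠ r → (pvSetI m r c v).getD a [] = m.getD a [] := by
    intro a ha
    unfold pvSetI
    simp [List.getD_eq_getElem?_getD, List.getElem?_set_ne (Ne.symm ha)]
  unfold pvIget
  by_cases hab : a = r
  · subst hab
    rw [e1]
    by_cases hbc : b = c
    · subst hbc
      simp only [and_self, if_true]
      rw [List.getD_eq_getElem _ _ (by rw [List.length_set]; omega), List.getElem_set_self]
    · simp only [hbc, and_false, if_false]
      simp [List.getD_eq_getElem?_getD, List.getElem?_set_ne (Ne.symm hbc)]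
  · simp only [hab, false_and, if_false, e2 a hab]

lemma pvIMatrix_ext {m m' : List (List Int)}
    (hlen : m.length = m'.length)
    (hrow : ∀ i, (m.getD i []).length = (m'.getD i []).length)
    (hp : ∀ r c, pvIget m r c = pvIget m' r c) : m = m' := by
  apply List.ext_getElem hlen
  intro r hr hr'
  have hrowr := hrow r
  rw [List.getD_eq_getElem _ _ hr, List.getD_eq_getElem _ _ hr'] at hrowr
  apply List.ext_getElem hrowr
  intro c hc hc'
  have := hp r c
  unfold pvIget at this
  rwa [List.getD_eq_getElem m [] hr, List.getD_eq_getElem m' [] hr',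
    List.getD_eq_getElem _ _ hc, List.getD_eq_getElem _ _ hc'] at this

-- ---------- consequences of a converged labelling ----------
lemma pvConnE_elig {rows cols : ℕ} {elig : ℕ → ℕ → Bool} {linked : ℕ → ℕ → ℕ → ℕ → Bool}
    {s q : ℕ × ℕ} (hs : elig s.1 s.2 = true)
    (h : pvConn rows cols (pvLabE elig linked) s q) : elig q.1 q.2 = true := by
  induction h with
  | refl => exact hs
  | step a b _ _ hE _ => exact hE.2.1

lemma pvLab_some_elig {rows cols : ℕ} {elig : ℕ → ℕ → Bool} {linked : ℕ → ℕ → ℕ → ℕ → Bool}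
    {lab : List (List (Option (ℕ × ℕ)))} (hspec : pvLabSpec rows cols elig linked lab)
    {p v : ℕ × ℕ} (hp : pvInB rows cols p) (hv : pvLget lab p.1 p.2 = some v) :
    elig p.1 p.2 = true := by
  by_cases he : elig p.1 p.2 = true
  · exact he
  · rw [hspec.1 p hp he] at hv
    cases hv

lemma pvLab_value_rep {rows cols : ℕ} {elig : ℕ → ℕ → Bool} {linked : ℕ → ℕ → ℕ → ℕ → Bool}
    {lab : List (List (Option (ℕ × ℕ)))}
    (hsym : ∀ a b, pvLabE elig linked a b → pvLabE elig linked b a)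
    (hspec : pvLabSpec rows cols elig linked lab)
    {p : ℕ × ℕ} (hp : pvInB rows cols p) (he : elig p.1 p.2 = true) :
    ∃ v, pvLget lab p.1 p.2 = some v ∧ pvLget lab v.1 v.2 = some v ∧
      pvConn rows cols (pvLabE elig linked) p v ∧
      (∀ q, pvConn rows cols (pvLabE elig linked) p q → pvLe v q) := by
  obtain ⟨v, hv, hconn, hmin⟩ := hspec.2 p hp he
  have hvin : pvInB rows cols v := pvConn_inB hp hconn
  have hve : elig v.1 v.2 = true := pvConnE_elig he hconn
  obtain ⟨m, hm, hmconn, hmmin⟩ := hspec.2 v hvin hve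
  have hvp : pvConn rows cols (pvLabE elig linked) v p := pvConn_symm hsym hp hconn
  have hmv : m = v := by
    refine pvLe_antisymm ?_ ?_
    · exact hmmin v .refl
    · exact hmin m (pvConn_trans hconn hmconn)
  rw [hmv] at hm
  exact ⟨v, hv, hm, hconn, hmin⟩

lemma pvLab_get_iff {rows cols : ℕ} {elig : ℕ → ℕ → Bool} {linked : ℕ → ℕ → ℕ → ℕ → Bool}
    {lab : List (List (Option (ℕ × ℕ)))}
    (hsym : ∀ a b, pvLabE elig linked a b → pvLabE elig linked b a)
    (hspec : pvLabSpec rows cols elig linked lab)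
    {v p : ℕ × ℕ} (hvin : pvInB rows cols v) (hvv : pvLget lab v.1 v.2 = some v)
    (hp : pvInB rows cols p) :
    pvLget lab p.1 p.2 = some v ↔ pvConn rows cols (pvLabE elig linked) v p := by
  have hve : elig v.1 v.2 = true := pvLab_some_elig hspec hvin hvv
  constructor
  · intro h
    have hpe : elig p.1 p.2 = true := pvLab_some_elig hspec hp h
    obtain ⟨w, hw, hconn, hmin⟩ := hspec.2 p hp hpe
    obtain rfl : w = v := by rw [hw] at h; injection h
    exact pvConn_symm hsym hp hconn
  · intro hconn
    have hpe : elig p.1 p.2 = true := pvConnE_elig hve hconn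
    obtain ⟨w, hw, hwconn, hwmin⟩ := hspec.2 p hp hpe
    have hpv : pvConn rows cols (pvLabE elig linked) p v := pvConn_symm hsym hvin hconn
    obtain ⟨mv, hmv, hmvconn, hmvmin⟩ := hspec.2 v hvin hve
    have hmveq : mv = v := by rw [hvv] at hmv; injection hmv with h; exact h.symm
    have h2 : pvLe v w := by
      rw [← hmveq]
      exact hmvmin w (pvConn_trans hconn hwconn)
    have hwv : w = v := pvLe_antisymm (hwmin v hpv) h2
    rw [hw, hwv]
-- ---------- flattening the nested row/column loops ----------
lemma pv_foldl_pairs {σ : Type} (l₁ l₂ : List ℕ) (F : σ → ℕ → ℕ → σ) (init : σ) :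
    l₁.foldl (fun s a => l₂.foldl (fun s b => F s a b) s) init
    = (l₁.flatMap (fun a => l₂.map (fun b => (a, b)))).foldl (fun s p => F s p.1 p.2) init := by
  rw [List.foldl_flatMap]
  apply PySem.List.foldl_congr_mem
  intro acc a _
  rw [List.foldl_map]

lemma pv_foldl_cells {σ : Type} (rows cols : ℕ) (F : σ → ℕ → ℕ → σ) (init : σ) :
    (List.range rows).foldl (fun s r => (List.range cols).foldl (fun s c => F s r c) s) init
    = (pvCells rows cols).foldl (fun s p => F s p.1 p.2) init := by
  rw [pvCells, ← pv_foldl_pairs]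

-- closure argument for pvConn against a closed set
lemma pvConn_subset_of_closed {rows cols : ℕ} {E : ℕ × ℕ → ℕ × ℕ → Prop}
    {s : ℕ × ℕ} {Blk F : ℕ × ℕ → Prop} (hF : F s)
    (hclosed : ∀ p q, F p → q ∈ pvNbrs rows cols p.1 p.2 → E p q → Blk q ∨ F q)
    (hblk : ∀ q, pvConn rows cols E s q → ¬ Blk q) :
    ∀ q, pvConn rows cols E s q → F q := by
  intro q h
  induction h with
  | refl => exact hF
  | step a b hc hn hE ih =>
    rcases hclosed a b ih hn hE with h' | h'
    · exact absurd h' (hblk b (.step a b hc hn hE))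
    · exact h'

-- writing one colour over a list of cells
lemma pv_writeFold (col : Int) :
    ∀ (l : List (ℕ × ℕ)) (m : List (List Int)),
      (∀ p ∈ l, p.1 < m.length ∧ p.2 < (m.getD p.1 []).length) →
      ((l.foldl (fun o p => pvSetI o p.1 p.2 col) m).length = m.length ∧
       (∀ i, ((l.foldl (fun o p => pvSetI o p.1 p.2 col) m).getD i []).length
          = (m.getD i []).length) ∧
       (∀ a b, pvIget (l.foldl (fun o p => pvSetI o p.1 p.2 col) m) a b
          = if (a, b) ∈ l then col else pvIget m a b)) := by
  intro l
  induction l with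
  | nil => intro m _; exact ⟨rfl, fun _ => rfl, fun a b => by simp⟩
  | cons x t ih =>
    intro m hl
    have hx := hl x List.mem_cons_self
    have hstep := ih (pvSetI m x.1 x.2 col) (by
      intro p hp
      have := hl p (List.mem_cons_of_mem _ hp)
      rw [pvSetI_length, pvSetI_rowlen]
      exact this)
    rw [List.foldl_cons]
    refine ⟨by rw [hstep.1, pvSetI_length], fun i => by rw [hstep.2.1 i, pvSetI_rowlen], ?_⟩
    intro a b
    rw [hstep.2.2 a b, pvIget_setI hx.1 hx.2 col a b]
    simp only [List.mem_cons]
    by_cases hmem : (a, b) ∈ t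
    · simp [hmem]
    · simp only [hmem, or_false, if_neg hmem]
      by_cases hab : (a, b) = x
      · have : a = x.1 ∧ b = x.2 := by
          rw [← hab]
          exact ⟨rfl, rfl⟩
        simp [hab, this]
      · have : ¬ (a = x.1 ∧ b = x.2) := by
          intro hcon
          exact hab (Prod.ext_iff.2 ⟨hcon.1, hcon.2⟩)
        simp [hab, this]

-- the grouping fold: from cells to (label, cell) pairs
lemma pv_pairs_filter (lab : List (List (Option (ℕ × ℕ)))) (k : ℕ × ℕ) :
    ∀ (l : List (ℕ × ℕ)),
      ((l.filterMap (fun p => (pvLget lab p.1 p.2).map (fun L => (L, p)))).filter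
        (fun pr => pr.1 == k)).map (fun pr => pr.2)
      = l.filter (fun q => pvLget lab q.1 q.2 == some k) := by
  intro l
  induction l with
  | nil => rfl
  | cons x t ih =>
    rw [List.filterMap_cons, List.filter_cons]
    cases hx : pvLget lab x.1 x.2 with
    | none =>
      simp only [Option.map_none]
      have hbeq : ((none : Option (ℕ × ℕ)) == some k) = false := rfl
      rw [hbeq, if_neg (by simp)]
      exact ih
    | some L =>
      simp only [Option.map_some]
      rw [List.filter_cons]
      have hbeq : (some L == some k) = (L == k) := rfl
      by_cases hLk : (L == k) = true
      · rw [if_pos (by simpa using hLk), List.map_cons, ih, hbeq, if_pos hLk]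
      · rw [if_neg (by simpa using hLk), ih, hbeq, if_neg (by simpa using hLk)]
-- ---------- the border seeding fold ----------
lemma pv_markFold (grid : List (List Int)) (rows cols : ℕ) :
    ∀ (l : List (ℕ × ℕ)) (vis : List (List Bool)) (q : List (ℕ × ℕ)),
      (∀ x ∈ l, pvInB rows cols x) → pvDims rows cols vis → q.Nodup →
      (∀ p, pvVis vis p ↔ p ∈ q) →
      (pvDims rows cols (l.foldl (fun (s : List (List Bool) × List (ℕ × ℕ)) p =>
          if pvGv grid p.1 p.2 ≠ 5 ∧ pvMget s.1 p.1 p.2 = false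
          then (pvMset s.1 p.1 p.2, s.2 ++ [p]) else s) (vis, q)).1 ∧
       ((l.foldl (fun (s : List (List Bool) × List (ℕ × ℕ)) p =>
          if pvGv grid p.1 p.2 ≠ 5 ∧ pvMget s.1 p.1 p.2 = false
          then (pvMset s.1 p.1 p.2, s.2 ++ [p]) else s) (vis, q)).2.Nodup ∧
       (∀ p, pvVis (l.foldl (fun (s : List (List Bool) × List (ℕ × ℕ)) p =>
          if pvGv grid p.1 p.2 ≠ 5 ∧ pvMget s.1 p.1 p.2 = false
          then (pvMset s.1 p.1 p.2, s.2 ++ [p]) else s) (vis, q)).1 p ↔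
          p ∈ (l.foldl (fun (s : List (List Bool) × List (ℕ × ℕ)) p =>
          if pvGv grid p.1 p.2 ≠ 5 ∧ pvMget s.1 p.1 p.2 = false
          then (pvMset s.1 p.1 p.2, s.2 ++ [p]) else s) (vis, q)).2) ∧
       (∀ p, p ∈ (l.foldl (fun (s : List (List Bool) × List (ℕ × ℕ)) p =>
          if pvGv grid p.1 p.2 ≠ 5 ∧ pvMget s.1 p.1 p.2 = false
          then (pvMset s.1 p.1 p.2, s.2 ++ [p]) else s) (vis, q)).2 ↔
          (p ∈ q ∨ (p ∈ l ∧ pvGv grid p.1 p.2 ≠ 5))))) := by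
  intro l
  induction l with
  | nil =>
    intro vis q hin hd hnd hiff
    exact ⟨hd, hnd, hiff, fun p => by simp⟩
  | cons x t ih =>
    intro vis q hin hd hnd hiff
    have hxin := hin x List.mem_cons_self
    rw [List.foldl_cons]
    by_cases hc : pvGv grid x.1 x.2 ≠ 5 ∧ pvMget vis x.1 x.2 = false
    · rw [if_pos hc]
      have hnotq : x ∉ q := fun hq => by
        have := (hiff x).2 hq
        rw [pvVis, hc.2] at this
        cases this
      have := ih (pvMset vis x.1 x.2) (q ++ [x])
        (fun y hy => hin y (List.mem_cons_of_mem _ hy))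
        (pvDims_mset hd x.1 x.2)
        (by
          refine List.Nodup.append hnd (List.nodup_singleton x) ?_
          intro y hy hy'
          rw [List.mem_singleton] at hy'
          subst hy'
          exact hnotq hy)
        (by
          intro p
          rw [pvVis_mset hd hxin p]
          simp only [List.mem_append, List.mem_singleton]
          rw [pvVis, ← pvVis]
          rw [hiff p]
          tauto)
      refine ⟨this.1, this.2.1, this.2.2.1, fun p => ?_⟩
      rw [this.2.2.2 p]
      simp only [List.mem_append, List.mem_cons, List.not_mem_nil, or_false]
      constructor
      · rintro (h' | h')
        · rcases h' with h' | h'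
          · exact Or.inl h'
          · exact Or.inr ⟨Or.inl h', by rw [h']; exact hc.1⟩
        · exact Or.inr ⟨Or.inr h'.1, h'.2⟩
      · rintro (h' | ⟨h' | h', h''⟩)
        · exact Or.inl (Or.inl h')
        · exact Or.inl (Or.inr h')
        · exact Or.inr ⟨h', h''⟩
    · rw [if_neg hc]
      have := ih vis q (fun y hy => hin y (List.mem_cons_of_mem _ hy)) hd hnd hiff
      refine ⟨this.1, this.2.1, this.2.2.1, fun p => ?_⟩
      rw [this.2.2.2 p]
      simp only [List.mem_cons]
      constructor
      · rintro (h' | h')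
        · exact Or.inl h'
        · exact Or.inr ⟨Or.inr h'.1, h'.2⟩
      · rintro (h' | ⟨h' | h', h''⟩)
        · exact Or.inl h'
        · subst h'
          rcases Decidable.em (pvMget vis p.1 p.2 = false) with hv | hv
          · exact absurd ⟨h'', hv⟩ hc
          · left
            exact (hiff p).1 (by
              rw [pvVis]
              cases hb : pvMget vis p.1 p.2 with
              | false => exact absurd hb hv
              | true => rfl)
        · exact Or.inr ⟨h', h''⟩

-- the queue after seeding is short enough for the fuel
lemma pv_q_len_le {rows cols : ℕ} {q : List (ℕ × ℕ)} (hnd : q.Nodup)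
    (hin : ∀ p ∈ q, pvInB rows cols p) : q.length ≤ rows * cols := by
  have hsub : q ⊆ pvCells rows cols := fun p hp => mem_pvCells.2 (hin p hp)
  have := List.Subperm.length_le (List.subperm_of_subset hnd hsub)
  have hlen : (pvCells rows cols).length = rows * cols := by
    simp [pvCells, List.length_flatMap]
  omega

lemma pv_unvis_le (rows cols : ℕ) (vis : List (List Bool)) :
    pvUnvis rows cols vis ≤ rows * cols := by
  have : pvUnvis rows cols vis ≤ (pvCells rows cols).length := List.length_filter_le _ _
  have hlen : (pvCells rows cols).length = rows * cols := by
    simp [pvCells, List.length_flatMap]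
  omega

-- running the outside BFS from a seed state
lemma pvOutside_A_run (grid : List (List Int)) (rows cols : ℕ)
    (vis : List (List Bool)) (q : List (ℕ × ℕ))
    (hd : pvDims rows cols vis) (hnd : q.Nodup)
    (hiff : ∀ p, pvVis vis p ↔ p ∈ q)
    (hq : ∀ p, p ∈ q ↔ pvSeedO grid rows cols p) :
    (∀ p, pvVis ((pvBfs rows cols (fun r c => !(pvGv grid r c == 5))
        (rows * cols + rows * cols + 1) vis q []).1) p ↔ pvOut grid rows cols p) ∧
    pvDims rows cols ((pvBfs rows cols (fun r c => !(pvGv grid r c == 5))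
        (rows * cols + rows * cols + 1) vis q []).1) := by
  have hInv : PvBfsInv rows cols (fun r c => !(pvGv grid r c == 5))
      (fun _ => False) (pvOut grid rows cols) vis q [] := by
    refine ⟨hd, hnd, List.nodup_nil, by simp, ?_, by simp, ?_, by simp, ?_, by simp⟩
    · intro p hp
      have := (hq p).1 hp
      refine ⟨this.1, ?_⟩
      simp only [Bool.not_eq_eq_eq_not, Bool.not_true, beq_eq_false_iff_ne]
      exact this.2.1
    · intro p
      constructor
      · intro h
        exact Or.inr (Or.inr ((hiff p).1 h))
      · intro h
        simp only [List.not_mem_nil, false_or, or_false] at h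
        exact (hiff p).2 h
    · intro p hp
      exact pvReach.base p ((hq p).1 hp)
  have hfuel : q.length + pvUnvis rows cols vis ≤ rows * cols + rows * cols + 1 := by
    have h1 := pv_q_len_le hnd (fun p hp => ((hq p).1 hp).1)
    have h2 := pv_unvis_le rows cols vis
    omega
  have hR : ∀ p n, pvOut grid rows cols p → n ∈ pvNbrs rows cols p.1 p.2 →
      (fun r c => !(pvGv grid r c == 5)) n.1 n.2 = true → ¬ False → pvOut grid rows cols n := by
    intro p n hp hn hok _
    refine pvReach.step p n hp hn ?_
    simpa using hok
  obtain ⟨hI, hmem⟩ := pvBfs_run rows cols _ _ _ hR _ vis q [] hInv hfuel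
  constructor
  · intro p
    constructor
    · intro hv
      have := (hI.visiff p).1 hv
      simp only [List.not_mem_nil, false_or, or_false] at this
      exact hI.accR p this
    · intro hout
      have h1 : ∀ p', pvSeedO grid rows cols p' →
          p' ∈ (pvBfs rows cols (fun r c => !(pvGv grid r c == 5))
            (rows * cols + rows * cols + 1) vis q []).2 := by
        intro p' hp'
        exact hmem p' (Or.inr ((hq p').2 hp'))
      have h2 : ∀ p' n, p' ∈ (pvBfs rows cols (fun r c => !(pvGv grid r c == 5))
            (rows * cols + rows * cols + 1) vis q []).2 →
          n ∈ pvNbrs rows cols p'.1 p'.2 → pvGv grid n.1 n.2 ≠ 5 →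
          False ∨ n ∈ (pvBfs rows cols (fun r c => !(pvGv grid r c == 5))
            (rows * cols + rows * cols + 1) vis q []).2 := by
        intro p' n hp' hn hok
        right
        have hvn := hI.closed p' hp' n hn (by simpa using hok)
        have := (hI.visiff n).1 hvn
        simp only [List.not_mem_nil, false_or, or_false] at this
        exact this
      have hsub := pvReach_subset_of_closed (Blk := fun _ => False) h1 h2 (fun _ _ h => h)
      exact (hI.visiff p).2 (Or.inr (Or.inl (hsub p hout)))
  · exact hI.dims

-- the B-side 'outside' saturation
lemma pvOutside_B_run (grid : List (List Int)) (rows cols : ℕ) :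
    ∀ p, pvVis (bLoop (bSat grid rows cols) (rows * cols + 1)
      ((List.range rows).map fun r => (List.range cols).map fun c =>
        !(pvGv grid r c == 5) && (r == 0 || r == rows - 1 || c == 0 || c == cols - 1))) p ↔
      pvOut grid rows cols p := by
  set out0 := (List.range rows).map fun r => (List.range cols).map fun c =>
      !(pvGv grid r c == 5) && (r == 0 || r == rows - 1 || c == 0 || c == cols - 1) with hout0
  have hd0 : pvDims rows cols out0 := by
    refine ⟨by simp [hout0], fun row hrow => ?_⟩
    simp only [hout0, List.mem_map] at hrow
    obtain ⟨r, _, hr⟩ := hrow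
    rw [← hr]
    simp
  have hget0 : ∀ p, pvInB rows cols p → pvMget out0 p.1 p.2 =
      (!(pvGv grid p.1 p.2 == 5) &&
        (p.1 == 0 || p.1 == rows - 1 || p.2 == 0 || p.2 == cols - 1)) := by
    intro p hp
    have h1 : pvMget out0 p.1 p.2 = (out0.getD p.1 []).getD p.2 false := rfl
    rw [h1, hout0, pv_getD_map_range _ [] hp.1, pv_getD_map_range _ false hp.2]
  apply pvSat_run
  refine ⟨hd0, ?_, ?_⟩
  · intro p hp
    by_cases hin : pvInB rows cols p
    · rw [pvVis, hget0 p hin] at hp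
      simp only [Bool.and_eq_true, Bool.not_eq_eq_eq_not, Bool.not_true, beq_eq_false_iff_ne,
        Bool.or_eq_true, beq_iff_eq] at hp
      exact pvReach.base p ⟨hin, hp.1, by tauto⟩
    · rw [pvVis, pvMget_oob hd0 hin] at hp
      cases hp
  · intro p hp
    rw [pvVis, hget0 p hp.1]
    simp only [Bool.and_eq_true, Bool.not_eq_eq_eq_not, Bool.not_true, beq_eq_false_iff_ne,
      Bool.or_eq_true, beq_iff_eq]
    refine ⟨hp.2.1, ?_⟩
    have := hp.2.2
    tauto
-- ---------- per-label component lists and the template dictionary ----------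
def pvClassL (rows cols : ℕ) (lab : List (List (Option (ℕ × ℕ)))) (v : ℕ × ℕ) : List (ℕ × ℕ) :=
  (pvCells rows cols).filter (fun q => pvLget lab q.1 q.2 == some v)

def pvRepD (grid : List (List Int)) (rows cols : ℕ) (lab : List (List (Option (ℕ × ℕ))))
    (l : List (ℕ × ℕ)) : PySem.Dict (List (ℕ × ℕ)) Int :=
  (l.filter (fun x => pvLget lab x.1 x.2 == some x)).foldl
    (fun d x => d.insert (pvShape (pvClassL rows cols lab x)) (pvGv grid x.1 x.2)) PySem.Dict.empty

lemma pvLab_some_inB {rows cols : ℕ} {lab : List (List (Option (ℕ × ℕ)))}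
    (hld : pvLDims rows cols lab) {p v : ℕ × ℕ} (h : pvLget lab p.1 p.2 = some v) :
    pvInB rows cols p := by
  by_contra hcon
  rw [pvLget_oob hld hcon] at h
  cases h

lemma pvLab_val_rep {rows cols : ℕ} {elig : ℕ → ℕ → Bool} {linked : ℕ → ℕ → ℕ → ℕ → Bool}
    {lab : List (List (Option (ℕ × ℕ)))}
    (hsym : ∀ a b, pvLabE elig linked a b → pvLabE elig linked b a)
    (hspec : pvLabSpec rows cols elig linked lab)
    {p v : ℕ × ℕ} (hp : pvInB rows cols p) (hv : pvLget lab p.1 p.2 = some v) :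
    pvLget lab v.1 v.2 = some v ∧ pvConn rows cols (pvLabE elig linked) v p := by
  obtain ⟨w, h1, h2, h3, h4⟩ := pvLab_value_rep hsym hspec hp (pvLab_some_elig hspec hp hv)
  obtain rfl : w = v := by rw [h1] at hv; injection hv
  exact ⟨h2, pvConn_symm hsym hp h3⟩

lemma pv_conn_gv {rows cols : ℕ} {grid : List (List Int)} {elig : ℕ → ℕ → Bool}
    {linked : ℕ → ℕ → ℕ → ℕ → Bool}
    (hlink : ∀ p q : ℕ × ℕ, linked p.1 p.2 q.1 q.2 = true ↔
      pvGv grid p.1 p.2 = pvGv grid q.1 q.2)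
    {s q : ℕ × ℕ} (h : pvConn rows cols (pvLabE elig linked) s q) :
    pvGv grid q.1 q.2 = pvGv grid s.1 s.2 := by
  induction h with
  | refl => rfl
  | step a b _ _ hE ih => rw [← (hlink a b).1 hE.2.2, ih]

-- ---------- the A-side template scan ----------
lemma pvScanT (grid : List (List Int)) (rows cols : ℕ) (outs : List (List Bool))
    (lab : List (List (Option (ℕ × ℕ)))) (elig : ℕ → ℕ → Bool) (linked : ℕ → ℕ → ℕ → ℕ → Bool)
    (houts : ∀ p, pvVis outs p ↔ pvOut grid rows cols p)
    (helig : ∀ p, pvInB rows cols p →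
      (elig p.1 p.2 = true ↔ (1 < pvGv grid p.1 p.2 ∧ ¬ pvOut grid rows cols p)))
    (hlink : ∀ p q : ℕ × ℕ, linked p.1 p.2 q.1 q.2 = true ↔
      pvGv grid p.1 p.2 = pvGv grid q.1 q.2)
    (hsym : ∀ a b, pvLabE elig linked a b → pvLabE elig linked b a)
    (hspec : pvLabSpec rows cols elig linked lab)
    (hld : pvLDims rows cols lab) :
    ∀ (suf pref : List (ℕ × ℕ)) (vis : List (List Bool)) (d : PySem.Dict (List (ℕ × ℕ)) Int),
      pvCells rows cols = pref ++ suf →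
      pvDims rows cols vis →
      (∀ p, pvVis vis p ↔ ∃ v, pvLget lab p.1 p.2 = some v ∧ v ∈ pref) →
      d = pvRepD grid rows cols lab pref →
      (pvDims rows cols (suf.foldl (fun (st : List (List Bool) × PySem.Dict (List (ℕ × ℕ)) Int) p =>
          if 1 < pvGv grid p.1 p.2 ∧ pvMget st.1 p.1 p.2 = false ∧ pvMget outs p.1 p.2 = false then
            (((pvBfs rows cols (fun a b => (pvGv grid a b == pvGv grid p.1 p.2) && !(pvMget outs a b))
                (rows * cols + rows * cols + 1) (pvMset st.1 p.1 p.2) [(p.1, p.2)] [])).1,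
             st.2.insert (pvShape ((pvBfs rows cols
                (fun a b => (pvGv grid a b == pvGv grid p.1 p.2) && !(pvMget outs a b))
                (rows * cols + rows * cols + 1) (pvMset st.1 p.1 p.2) [(p.1, p.2)] [])).2)
              (pvGv grid p.1 p.2))
          else st) (vis, d)).1 ∧
       (∀ p, pvVis (suf.foldl (fun (st : List (List Bool) × PySem.Dict (List (ℕ × ℕ)) Int) p =>
          if 1 < pvGv grid p.1 p.2 ∧ pvMget st.1 p.1 p.2 = false ∧ pvMget outs p.1 p.2 = false then
            (((pvBfs rows cols (fun a b => (pvGv grid a b == pvGv grid p.1 p.2) && !(pvMget outs a b))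
                (rows * cols + rows * cols + 1) (pvMset st.1 p.1 p.2) [(p.1, p.2)] [])).1,
             st.2.insert (pvShape ((pvBfs rows cols
                (fun a b => (pvGv grid a b == pvGv grid p.1 p.2) && !(pvMget outs a b))
                (rows * cols + rows * cols + 1) (pvMset st.1 p.1 p.2) [(p.1, p.2)] [])).2)
              (pvGv grid p.1 p.2))
          else st) (vis, d)).1 p ↔
          ∃ v, pvLget lab p.1 p.2 = some v ∧ v ∈ pref ++ suf) ∧
       (suf.foldl (fun (st : List (List Bool) × PySem.Dict (List (ℕ × ℕ)) Int) p =>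
          if 1 < pvGv grid p.1 p.2 ∧ pvMget st.1 p.1 p.2 = false ∧ pvMget outs p.1 p.2 = false then
            (((pvBfs rows cols (fun a b => (pvGv grid a b == pvGv grid p.1 p.2) && !(pvMget outs a b))
                (rows * cols + rows * cols + 1) (pvMset st.1 p.1 p.2) [(p.1, p.2)] [])).1,
             st.2.insert (pvShape ((pvBfs rows cols
                (fun a b => (pvGv grid a b == pvGv grid p.1 p.2) && !(pvMget outs a b))
                (rows * cols + rows * cols + 1) (pvMset st.1 p.1 p.2) [(p.1, p.2)] [])).2)
              (pvGv grid p.1 p.2))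
          else st) (vis, d)).2 = pvRepD grid rows cols lab (pref ++ suf)) := by
  intro suf
  induction suf with
  | nil =>
    intro pref vis d hsplit hdv hvis hd
    simp only [List.foldl_nil, List.append_nil]
    exact ⟨hdv, hvis, hd⟩
  | cons x t ih =>
    intro pref vis d hsplit hdv hvis hd
    obtain ⟨hpl, hnp, hxin, hclosure⟩ := pvPrefix_closed hsplit
    have hxeta : ((x.1, x.2) : ℕ × ℕ) = x := rfl
    rw [List.foldl_cons]
    by_cases hg : 1 < pvGv grid x.1 x.2 ∧ pvMget vis x.1 x.2 = false ∧
        pvMget outs x.1 x.2 = false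
    · rw [if_pos hg]
      -- x is eligible and is the representative of its component
      have hnout : ¬ pvOut grid rows cols x := by
        intro hout
        have := (houts x).2 hout
        rw [pvVis, hg.2.2] at this
        cases this
      have heligx : elig x.1 x.2 = true := (helig x hxin).2 ⟨hg.1, hnout⟩
      have hnof : ¬ ∃ v, pvLget lab x.1 x.2 = some v ∧ v ∈ pref := by
        intro hcon
        have := (hvis x).2 hcon
        rw [pvVis, hg.2.1] at this
        cases this
      obtain ⟨v, hv1, hv2, hv3, hv4⟩ := pvLab_value_rep hsym hspec hxin heligx
      have hrepx : pvLget lab x.1 x.2 = some x := by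
        have hvx : v = x := by
          by_contra hne
          have hlt : pvLt v x := ⟨hv4 x .refl, hne⟩
          exact hnof ⟨v, hv1, hclosure v (pvConn_inB hxin hv3) hlt⟩
        rwa [hvx] at hv1
      -- run the BFS for x's component
      set okx := fun a b => (pvGv grid a b == pvGv grid x.1 x.2) && !(pvMget outs a b) with hokx
      have hok_iff : ∀ n : ℕ × ℕ, pvInB rows cols n →
          (okx n.1 n.2 = true ↔ (pvGv grid n.1 n.2 = pvGv grid x.1 x.2 ∧
            ¬ pvOut grid rows cols n)) := by
        intro n hnin
        rw [hokx]
        simp only [Bool.and_eq_true, beq_iff_eq, Bool.not_eq_eq_eq_not, Bool.not_true]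
        constructor
        · rintro ⟨h1, h2⟩
          refine ⟨h1, fun hout => ?_⟩
          have := (houts n).2 hout
          rw [pvVis] at this
          rw [this] at h2
          cases h2
        · rintro ⟨h1, h2⟩
          refine ⟨h1, ?_⟩
          cases hb : pvMget outs n.1 n.2 with
          | false => rfl
          | true => exact absurd ((houts n).1 hb) h2
      have hRstep : ∀ p n : ℕ × ℕ, pvLget lab p.1 p.2 = some x → n ∈ pvNbrs rows cols p.1 p.2 →
          okx n.1 n.2 = true → ¬ (∃ w, pvLget lab n.1 n.2 = some w ∧ w ∈ pref) →
          pvLget lab n.1 n.2 = some x := by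
        intro p n hp hn hok _
        have hpin : pvInB rows cols p := pvLab_some_inB hld hp
        have hnin : pvInB rows cols n := pvNbrs_inB hn
        have hconnxp : pvConn rows cols (pvLabE elig linked) x p :=
          (pvLab_get_iff hsym hspec hxin hrepx hpin).1 hp
        have hgvp : pvGv grid p.1 p.2 = pvGv grid x.1 x.2 := pv_conn_gv hlink hconnxp
        obtain ⟨hgvn, hnoutn⟩ := (hok_iff n hnin).1 hok
        have heligp : elig p.1 p.2 = true := pvLab_some_elig hspec hpin hp
        have heligne : elig n.1 n.2 = true := (helig n hnin).2 ⟨by omega, hnoutn⟩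
        have hE : pvLabE elig linked p n := ⟨heligp, heligne, (hlink p n).2 (by omega)⟩
        exact (pvLab_get_iff hsym hspec hxin hrepx hnin).2 (.step p n hconnxp hn hE)
      have hInv : PvBfsInv rows cols okx
          (fun p => ∃ w, pvLget lab p.1 p.2 = some w ∧ w ∈ pref)
          (fun p => pvLget lab p.1 p.2 = some x)
          (pvMset vis x.1 x.2) [(x.1, x.2)] [] := by
        rw [hxeta]
        refine ⟨pvDims_mset hdv x.1 x.2, List.nodup_singleton x, List.nodup_nil, by simp,
          ?_, by simp, ?_, by simp, ?_, by simp⟩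
        · intro p hp
          rw [List.mem_singleton] at hp
          subst hp
          refine ⟨hxin, (hok_iff p hxin).2 ⟨rfl, hnout⟩⟩
        · intro p
          rw [pvVis_mset hdv hxin p]
          simp only [List.not_mem_nil, false_or, List.mem_singleton]
          rw [hvis p]
          exact or_comm
        · intro p hp
          rw [List.mem_singleton] at hp
          subst hp
          exact hrepx
      have hfuel : ([(x.1, x.2)] : List (ℕ × ℕ)).length +
          pvUnvis rows cols (pvMset vis x.1 x.2) ≤ rows * cols + rows * cols + 1 := by
        have := pv_unvis_le rows cols (pvMset vis x.1 x.2)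
        simp only [List.length_cons, List.length_nil]
        omega
      obtain ⟨hI, hmem⟩ := pvBfs_run rows cols okx _ _ hRstep _ (pvMset vis x.1 x.2)
        [(x.1, x.2)] [] hInv hfuel
      set res := pvBfs rows cols okx (rows * cols + rows * cols + 1)
        (pvMset vis x.1 x.2) [(x.1, x.2)] [] with hres
      -- the collected component is exactly the class of x
      have haccR : ∀ p ∈ res.2, pvLget lab p.1 p.2 = some x := fun p hp => hI.accR p hp
      have hxmem : x ∈ res.2 := by
        have := hmem (x.1, x.2) (Or.inr List.mem_cons_self)
        rwa [hxeta] at this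
      have hclassmem : ∀ q, pvLget lab q.1 q.2 = some x → q ∈ res.2 := by
        intro q hq
        have hqin : pvInB rows cols q := pvLab_some_inB hld hq
        have hconn : pvConn rows cols (pvLabE elig linked) x q :=
          (pvLab_get_iff hsym hspec hxin hrepx hqin).1 hq
        refine pvConn_subset_of_closed (Blk := fun p => ∃ w, pvLget lab p.1 p.2 = some w ∧
          w ∈ pref) hxmem ?_ ?_ q hconn
        · intro a b ha hb hE
          have hain : pvInB rows cols a := hI.accin a ha
          have hbin : pvInB rows cols b := pvNbrs_inB hb
          have hconnxa : pvConn rows cols (pvLabE elig linked) x a :=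
            (pvLab_get_iff hsym hspec hxin hrepx hain).1 (haccR a ha)
          have hgva : pvGv grid a.1 a.2 = pvGv grid x.1 x.2 := pv_conn_gv hlink hconnxa
          have hgvb : pvGv grid b.1 b.2 = pvGv grid a.1 a.2 := ((hlink a b).1 hE.2.2).symm
          have hnoutb : ¬ pvOut grid rows cols b := by
            intro hout
            have := (helig b hbin).1 hE.2.1
            exact this.2 hout
          have hokb : okx b.1 b.2 = true := (hok_iff b hbin).2 ⟨by omega, hnoutb⟩
          have := hI.closed a ha b hb hokb
          have h2 := (hI.visiff b).1 this
          simp only [List.not_mem_nil, or_false] at h2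
          exact h2
        · intro q' hq'
          intro hblk
          obtain ⟨w, hw1, hw2⟩ := hblk
          have hq'in : pvInB rows cols q' := pvLab_some_inB hld hw1
          have : pvLget lab q'.1 q'.2 = some x :=
            (pvLab_get_iff hsym hspec hxin hrepx hq'in).2 hq'
          obtain rfl : w = x := by rw [this] at hw1; injection hw1 with h; exact h.symm
          exact hnp hw2
      have hperm : List.Perm res.2 (pvClassL rows cols lab x) := by
        have hnodB : (pvClassL rows cols lab x).Nodup := by
          rw [pvClassL]
          exact List.Nodup.filter _ (pvCells_nodup rows cols)
        apply (List.perm_ext_iff_of_nodup hI.accnd hnodB).2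
        intro q
        constructor
        · intro hq
          rw [pvClassL, List.mem_filter]
          refine ⟨mem_pvCells.2 (hI.accin q hq), by simp [haccR q hq]⟩
        · intro hq
          rw [pvClassL, List.mem_filter] at hq
          exact hclassmem q (by simpa using hq.2)
      have hshape : pvShape res.2 = pvShape (pvClassL rows cols lab x) := pvShape_perm hperm
      -- new dictionary
      have hdict : (d.insert (pvShape res.2) (pvGv grid x.1 x.2))
          = pvRepD grid rows cols lab (pref ++ [x]) := by
        rw [hd, pvRepD, pvRepD, List.filter_append, List.foldl_append]
        rw [show List.filter (fun y => pvLget lab y.1 y.2 == some y) [x] = [x] by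
          simp [List.filter_cons, hrepx]]
        rw [List.foldl_cons, hshape]
        rfl
      -- new visited characterisation
      have hvis' : ∀ p, pvVis res.1 p ↔ ∃ v, pvLget lab p.1 p.2 = some v ∧
          v ∈ pref ++ [x] := by
        intro p
        rw [hI.visiff p]
        simp only [List.not_mem_nil, or_false, List.mem_append, List.mem_cons]
        constructor
        · rintro (⟨w, hw1, hw2⟩ | h)
          · exact ⟨w, hw1, Or.inl hw2⟩
          · exact ⟨x, haccR p h, Or.inr rfl⟩
        · rintro ⟨w, hw1, hw2⟩
          rcases hw2 with hw2 | hw2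
          · exact Or.inl ⟨w, hw1, hw2⟩
          · subst hw2
            exact Or.inr (hclassmem p hw1)
      have := ih (pref ++ [x]) res.1 (d.insert (pvShape res.2) (pvGv grid x.1 x.2))
        (by rw [hsplit]; simp) hI.dims hvis' hdict
      rw [show (pref ++ x :: t) = ((pref ++ [x]) ++ t) by simp] 
      exact this
    · rw [if_neg hg]
      -- x contributes nothing: it is not a representative
      have hnotrep : ¬ pvLget lab x.1 x.2 = some x := by
        intro hrep
        have heligx : elig x.1 x.2 = true := pvLab_some_elig hspec hxin hrep
        have h2 := (helig x hxin).1 heligx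
        have houtx : pvMget outs x.1 x.2 = false := by
          cases hb : pvMget outs x.1 x.2 with
          | false => rfl
          | true => exact absurd ((houts x).1 hb) h2.2
        have hvisx : pvMget vis x.1 x.2 = true := by
          cases hb : pvMget vis x.1 x.2 with
          | true => rfl
          | false => exact absurd ⟨h2.1, hb, houtx⟩ hg
        obtain ⟨w, hw1, hw2⟩ := (hvis x).1 hvisx
        obtain rfl : w = x := by rw [hrep] at hw1; injection hw1 with h; exact h.symm
        exact hnp hw2
      have hdict : d = pvRepD grid rows cols lab (pref ++ [x]) := by
        rw [hd, pvRepD, pvRepD, List.filter_append]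
        rw [show List.filter (fun y => pvLget lab y.1 y.2 == some y) [x] = [] by
          simp [List.filter_cons, hnotrep]]
        rw [List.append_nil]
      have hvis' : ∀ p, pvVis vis p ↔ ∃ v, pvLget lab p.1 p.2 = some v ∧ v ∈ pref ++ [x] := by
        intro p
        rw [hvis p]
        constructor
        · rintro ⟨w, hw1, hw2⟩
          exact ⟨w, hw1, List.mem_append.2 (Or.inl hw2)⟩
        · rintro ⟨w, hw1, hw2⟩
          rcases List.mem_append.1 hw2 with hw2 | hw2
          · exact ⟨w, hw1, hw2⟩
          · rw [List.mem_singleton] at hw2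
            subst hw2
            have hpin : pvInB rows cols p := pvLab_some_inB hld hw1
            have := (pvLab_val_rep hsym hspec hpin hw1).1
            exact absurd this hnotrep
      have := ih (pref ++ [x]) vis d (by rw [hsplit]; simp) hdv hvis' hdict
      rw [show (pref ++ x :: t) = ((pref ++ [x]) ++ t) by simp]
      exact this
-- ---------- the representative key list of the grouping dictionary ----------
lemma pv_keyList_aux {rows cols : ℕ} {elig : ℕ → ℕ → Bool} {linked : ℕ → ℕ → ℕ → ℕ → Bool}
    {lab : List (List (Option (ℕ × ℕ)))}
    (hsym : ∀ a b, pvLabE elig linked a b → pvLabE elig linked b a)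
    (hspec : pvLabSpec rows cols elig linked lab)
    (hld : pvLDims rows cols lab) :
    ∀ (suf pref : List (ℕ × ℕ)),
      pvCells rows cols = pref ++ suf →
      PySem.Set.ofList (pref.filterMap (fun p => pvLget lab p.1 p.2))
        = pref.filter (fun x => pvLget lab x.1 x.2 == some x) →
      PySem.Set.ofList ((pref ++ suf).filterMap (fun p => pvLget lab p.1 p.2))
        = (pref ++ suf).filter (fun x => pvLget lab x.1 x.2 == some x) := by
  intro suf
  induction suf with
  | nil => intro pref _ h; simpa using h
  | cons x t ih =>
    intro pref hsplit hinv
    obtain ⟨hpl, hnp, hxin, hclosure⟩ := pvPrefix_closed hsplit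
    have hstep : PySem.Set.ofList ((pref ++ [x]).filterMap (fun p => pvLget lab p.1 p.2))
        = (pref ++ [x]).filter (fun y => pvLget lab y.1 y.2 == some y) := by
      rw [List.filterMap_append, List.filter_append]
      cases hx : pvLget lab x.1 x.2 with
      | none =>
        rw [show List.filterMap (fun p => pvLget lab p.1 p.2) [x] = [] by
            simp [List.filterMap_cons, hx],
          show List.filter (fun y => pvLget lab y.1 y.2 == some y) [x] = [] by
            simp [List.filter_cons, hx],
          List.append_nil, List.append_nil, hinv]
      | some v =>
        rw [show List.filterMap (fun p => pvLget lab p.1 p.2) [x] = [v] by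
          simp [List.filterMap_cons, hx]]
        rw [PySem.Set.ofList_append_singleton, hinv]
        obtain ⟨hvv, hconn⟩ := pvLab_val_rep hsym hspec hxin hx
        by_cases hvx : v = x
        · subst hvx
          rw [show List.filter (fun y => pvLget lab y.1 y.2 == some y) [v] = [v] by
            simp [List.filter_cons, hx]]
          rw [PySem.Set.add_of_not_mem]
          intro hmem
          rw [List.mem_filter] at hmem
          exact hnp hmem.1
        · rw [show List.filter (fun y => pvLget lab y.1 y.2 == some y) [x] = [] by
            simp only [List.filter_cons, List.filter_nil]
            rw [show (pvLget lab x.1 x.2 == some x) = false by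
              rw [hx]
              simp [hvx]]
            simp]
          rw [List.append_nil, PySem.Set.add_of_mem]
          have hvin : pvInB rows cols v := pvLab_some_inB hld hvv
          have hlt : pvLt v x := ⟨by
              obtain ⟨w', h1, h2, h3, h4⟩ := pvLab_value_rep hsym hspec hxin
                (pvLab_some_elig hspec hxin hx)
              obtain rfl : w' = v := by rw [h1] at hx; injection hx
              exact h4 x .refl, hvx⟩
          have hvpref : v ∈ pref := hclosure v hvin hlt
          rw [List.mem_filter]
          exact ⟨hvpref, by simp [hvv]⟩
    have := ih (pref ++ [x]) (by rw [hsplit]; simp) hstep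
    rw [show (pref ++ x :: t) = ((pref ++ [x]) ++ t) by simp]
    exact this

lemma pv_keyList {rows cols : ℕ} {elig : ℕ → ℕ → Bool} {linked : ℕ → ℕ → ℕ → ℕ → Bool}
    {lab : List (List (Option (ℕ × ℕ)))}
    (hsym : ∀ a b, pvLabE elig linked a b → pvLabE elig linked b a)
    (hspec : pvLabSpec rows cols elig linked lab)
    (hld : pvLDims rows cols lab) :
    PySem.Set.ofList ((pvCells rows cols).filterMap (fun p => pvLget lab p.1 p.2))
      = (pvCells rows cols).filter (fun x => pvLget lab x.1 x.2 == some x) := by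
  have := pv_keyList_aux hsym hspec hld (pvCells rows cols) [] (by simp) (by simp)
  simpa using this

lemma pv_foldl_group_modify (lab : List (List (Option (ℕ × ℕ)))) :
    ∀ (l : List (ℕ × ℕ)) (init : PySem.Dict (ℕ × ℕ) (List (ℕ × ℕ))),
      l.foldl (fun d p =>
        match pvLget lab p.1 p.2 with
        | some L => d.modify L [] (fun vs => vs ++ [(p.1, p.2)])
        | none => d) init
      = (l.filterMap (fun p => (pvLget lab p.1 p.2).map (fun L => (L, p)))).foldl
          (fun d pr => d.modify pr.1 [] (fun vs => vs ++ [pr.2])) init := by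
  intro l
  induction l with
  | nil => intro init; rfl
  | cons x t ih =>
    intro init
    rw [List.foldl_cons, List.filterMap_cons]
    cases hx : pvLget lab x.1 x.2 with
    | none => simp only [Option.map_none]; exact ih init
    | some L =>
      simp only [Option.map_some]
      rw [List.foldl_cons]
      exact ih (init.modify L [] (fun vs => vs ++ [x]))

-- ---------- characterising bGroups and the resulting template dictionary ----------
lemma bGroups_items {rows cols : ℕ} {elig : ℕ → ℕ → Bool} {linked : ℕ → ℕ → ℕ → ℕ → Bool}
    {lab : List (List (Option (ℕ × ℕ)))}
    (hsym : ∀ a b, pvLabE elig linked a b → pvLabE elig linked b a)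
    (hspec : pvLabSpec rows cols elig linked lab)
    (hld : pvLDims rows cols lab) :
    (bGroups rows cols lab).items
      = ((pvCells rows cols).filter (fun x => pvLget lab x.1 x.2 == some x)).map
          (fun k => (k, pvClassL rows cols lab k)) := by
  have hflat : bGroups rows cols lab
      = ((pvCells rows cols).filterMap (fun p => (pvLget lab p.1 p.2).map (fun L => (L, p)))).foldl
          (fun d pr => d.modify pr.1 [] (fun vs => vs ++ [pr.2])) PySem.Dict.empty := by
    rw [bGroups]
    simp only [bGetL_e]
    rw [pv_foldl_cells rows cols
      (fun (d : PySem.Dict (ℕ × ℕ) (List (ℕ × ℕ))) r c =>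
        match pvLget lab r c with
        | some L => d.modify L [] (fun vs => vs ++ [(r, c)])
        | none => d) PySem.Dict.empty]
    exact pv_foldl_group_modify lab (pvCells rows cols) PySem.Dict.empty
  have hkeys : (bGroups rows cols lab).keys
      = (pvCells rows cols).filter (fun x => pvLget lab x.1 x.2 == some x) := by
    rw [hflat, PySem.Dict.keys_foldl_modify_key]
    rw [show ((pvCells rows cols).filterMap
        (fun p => (pvLget lab p.1 p.2).map (fun L => (L, p)))).map Prod.fst
        = (pvCells rows cols).filterMap (fun p => pvLget lab p.1 p.2) by
      rw [List.map_filterMap]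
      apply List.filterMap_congr
      intro p _
      cases h : pvLget lab p.1 p.2 <;> simp]
    rw [show PySem.Set.update PySem.Dict.empty.keys ((pvCells rows cols).filterMap
        (fun p => pvLget lab p.1 p.2)) = PySem.Set.ofList ((pvCells rows cols).filterMap
        (fun p => pvLget lab p.1 p.2)) from rfl]
    exact pv_keyList hsym hspec hld
  have hnodup2 : (bGroups rows cols lab).keys.Nodup := by
    rw [hflat]
    exact PySem.Dict.nodup_keys_foldl_modify_key _ _ _ _ _ (by simp [PySem.Dict.keys_empty])
  have hgetD : ∀ k, (bGroups rows cols lab).getD k [] = pvClassL rows cols lab k := by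
    intro k
    rw [hflat, PySem.Dict.getD_foldl_modify_append, PySem.Dict.getD_empty]
    rw [List.nil_append]
    exact pv_pairs_filter lab k (pvCells rows cols)
  rw [PySem.Dict.items_eq_map_keys _ hnodup2 [], hkeys]
  apply List.map_congr_left
  intro k _
  rw [hgetD k]

lemma pvTmpl_eq {grid : List (List Int)} {rows cols : ℕ} {elig : ℕ → ℕ → Bool}
    {linked : ℕ → ℕ → ℕ → ℕ → Bool} {lab : List (List (Option (ℕ × ℕ)))}
    (hsym : ∀ a b, pvLabE elig linked a b → pvLabE elig linked b a)
    (hspec : pvLabSpec rows cols elig linked lab)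
    (hld : pvLDims rows cols lab) :
    (bGroups rows cols lab).items.foldl
      (fun (d : PySem.Dict (List (ℕ × ℕ)) Int) kv => d.insert (pvShape kv.2)
        (pvGv grid kv.1.1 kv.1.2)) PySem.Dict.empty
      = pvRepD grid rows cols lab (pvCells rows cols) := by
  rw [bGroups_items hsym hspec hld, List.foldl_map, pvRepD]
-- ---------- the expected output of the blue recolouring ----------
def pvExpected (grid : List (List Int)) (rows cols : ℕ) (labB : List (List (Option (ℕ × ℕ))))
    (tmpl : PySem.Dict (List (ℕ × ℕ)) Int) (pref : List (ℕ × ℕ)) (a b : ℕ) : Int :=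
  ((pvLget labB a b).map (fun v =>
    if v ∈ pref then (tmpl.get? (pvShape (pvClassL rows cols labB v))).getD (pvGv grid a b)
    else pvGv grid a b)).getD (pvGv grid a b)

lemma pvExpected_none {grid : List (List Int)} {rows cols : ℕ}
    {labB : List (List (Option (ℕ × ℕ)))} {tmpl : PySem.Dict (List (ℕ × ℕ)) Int}
    {pref : List (ℕ × ℕ)} {a b : ℕ} (h : pvLget labB a b = none) :
    pvExpected grid rows cols labB tmpl pref a b = pvGv grid a b := by
  simp [pvExpected, h]

lemma pvExpected_some {grid : List (List Int)} {rows cols : ℕ}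
    {labB : List (List (Option (ℕ × ℕ)))} {tmpl : PySem.Dict (List (ℕ × ℕ)) Int}
    {pref : List (ℕ × ℕ)} {a b : ℕ} {v : ℕ × ℕ} (h : pvLget labB a b = some v) :
    pvExpected grid rows cols labB tmpl pref a b =
      if v ∈ pref then (tmpl.get? (pvShape (pvClassL rows cols labB v))).getD (pvGv grid a b)
      else pvGv grid a b := by
  simp [pvExpected, h]

lemma pvVis_replicate_false (rows cols : ℕ) (p : ℕ × ℕ) :
    ¬ pvVis (List.replicate rows (List.replicate cols false)) p := by
  intro h
  rw [pvVis] at h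
  unfold pvMget at h
  by_cases hr : p.1 < rows
  · have e : (List.replicate rows (List.replicate cols false)).getD p.1 []
        = List.replicate cols false := by
      rw [List.getD_eq_getElem _ _ (by simpa using hr)]
      exact List.getElem_replicate _
    rw [e] at h
    by_cases hc : p.2 < cols
    · have e2 : (List.replicate cols false).getD p.2 false = false := by
        rw [List.getD_eq_getElem _ _ (by simpa using hc)]
        exact List.getElem_replicate _
      rw [e2] at h
      cases h
    · rw [List.getD_eq_default _ _ (by simpa using hc)] at h
      cases h
  · have e : (List.replicate rows (List.replicate cols false)).getD p.1 [] = [] :=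
      List.getD_eq_default _ _ (by simpa using hr)
    rw [e] at h
    simp at h

-- a helper for membership in a class list
lemma pv_mem_classL {rows cols : ℕ} {lab : List (List (Option (ℕ × ℕ)))} {v q : ℕ × ℕ}
    (hld : pvLDims rows cols lab) :
    q ∈ pvClassL rows cols lab v ↔ pvLget lab q.1 q.2 = some v := by
  rw [pvClassL, List.mem_filter]
  constructor
  · intro h
    simpa using h.2
  · intro h
    exact ⟨mem_pvCells.2 (pvLab_some_inB hld h), by simp [h]⟩

-- ---------- the A-side blue scan ----------
lemma pvScanB (grid : List (List Int)) (rows cols : ℕ)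
    (labT labB : List (List (Option (ℕ × ℕ))))
    (eligT : ℕ → ℕ → Bool) (linkedT : ℕ → ℕ → ℕ → ℕ → Bool)
    (eligB : ℕ → ℕ → Bool) (linkedB : ℕ → ℕ → ℕ → ℕ → Bool)
    (tmpl : PySem.Dict (List (ℕ × ℕ)) Int)
    (heligT : ∀ p, pvInB rows cols p →
      (eligT p.1 p.2 = true ↔ (1 < pvGv grid p.1 p.2 ∧ ¬ pvOut grid rows cols p)))
    (hspecT : pvLabSpec rows cols eligT linkedT labT)
    (heligB : ∀ p, pvInB rows cols p → (eligB p.1 p.2 = true ↔ pvGv grid p.1 p.2 = 1))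
    (hlinkB : ∀ a b c d : ℕ, linkedB a b c d = true)
    (hsymB : ∀ a b, pvLabE eligB linkedB a b → pvLabE eligB linkedB b a)
    (hspecB : pvLabSpec rows cols eligB linkedB labB)
    (hldB : pvLDims rows cols labB)
    (hrows : rows = grid.length)
    (hpre : ∀ i, i < rows → cols ≤ (grid.getD i []).length) :
    ∀ (suf pref : List (ℕ × ℕ)) (vis : List (List Bool)) (out : List (List Int)),
      pvCells rows cols = pref ++ suf →
      pvDims rows cols vis →
      (∀ p, pvVis vis p ↔ ((∃ v, pvLget labT p.1 p.2 = some v) ∨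
        (∃ v, pvLget labB p.1 p.2 = some v ∧ v ∈ pref))) →
      out.length = grid.length →
      (∀ i, (out.getD i []).length = (grid.getD i []).length) →
      (∀ a b, pvIget out a b = pvExpected grid rows cols labB tmpl pref a b) →
      ((suf.foldl (fun (sb : List (List Bool) × List (List Int)) p =>
          if (pvGv grid p.1 p.2 == 1) = true ∧ pvMget sb.1 p.1 p.2 = false then
            match tmpl.get? (pvShape ((pvBfs rows cols (fun a b => pvGv grid a b == 1)
                (rows * cols + rows * cols + 1) (pvMset sb.1 p.1 p.2) [(p.1, p.2)] [])).2) with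
            | some col =>
              (((pvBfs rows cols (fun a b => pvGv grid a b == 1)
                  (rows * cols + rows * cols + 1) (pvMset sb.1 p.1 p.2) [(p.1, p.2)] [])).1,
               ((pvBfs rows cols (fun a b => pvGv grid a b == 1)
                  (rows * cols + rows * cols + 1) (pvMset sb.1 p.1 p.2) [(p.1, p.2)] [])).2.foldl
                  (fun o q => pvSetI o q.1 q.2 col) sb.2)
            | none =>
              (((pvBfs rows cols (fun a b => pvGv grid a b == 1)
                  (rows * cols + rows * cols + 1) (pvMset sb.1 p.1 p.2) [(p.1, p.2)] [])).1, sb.2)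
          else sb) (vis, out)).2.length = grid.length) ∧
       (∀ i, (((suf.foldl (fun (sb : List (List Bool) × List (List Int)) p =>
          if (pvGv grid p.1 p.2 == 1) = true ∧ pvMget sb.1 p.1 p.2 = false then
            match tmpl.get? (pvShape ((pvBfs rows cols (fun a b => pvGv grid a b == 1)
                (rows * cols + rows * cols + 1) (pvMset sb.1 p.1 p.2) [(p.1, p.2)] [])).2) with
            | some col =>
              (((pvBfs rows cols (fun a b => pvGv grid a b == 1)
                  (rows * cols + rows * cols + 1) (pvMset sb.1 p.1 p.2) [(p.1, p.2)] [])).1,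
               ((pvBfs rows cols (fun a b => pvGv grid a b == 1)
                  (rows * cols + rows * cols + 1) (pvMset sb.1 p.1 p.2) [(p.1, p.2)] [])).2.foldl
                  (fun o q => pvSetI o q.1 q.2 col) sb.2)
            | none =>
              (((pvBfs rows cols (fun a b => pvGv grid a b == 1)
                  (rows * cols + rows * cols + 1) (pvMset sb.1 p.1 p.2) [(p.1, p.2)] [])).1, sb.2)
          else sb) (vis, out)).2.getD i []).length = (grid.getD i []).length)) ∧
       (∀ a b, pvIget ((suf.foldl (fun (sb : List (List Bool) × List (List Int)) p =>
          if (pvGv grid p.1 p.2 == 1) = true ∧ pvMget sb.1 p.1 p.2 = false then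
            match tmpl.get? (pvShape ((pvBfs rows cols (fun a b => pvGv grid a b == 1)
                (rows * cols + rows * cols + 1) (pvMset sb.1 p.1 p.2) [(p.1, p.2)] [])).2) with
            | some col =>
              (((pvBfs rows cols (fun a b => pvGv grid a b == 1)
                  (rows * cols + rows * cols + 1) (pvMset sb.1 p.1 p.2) [(p.1, p.2)] [])).1,
               ((pvBfs rows cols (fun a b => pvGv grid a b == 1)
                  (rows * cols + rows * cols + 1) (pvMset sb.1 p.1 p.2) [(p.1, p.2)] [])).2.foldl
                  (fun o q => pvSetI o q.1 q.2 col) sb.2)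
            | none =>
              (((pvBfs rows cols (fun a b => pvGv grid a b == 1)
                  (rows * cols + rows * cols + 1) (pvMset sb.1 p.1 p.2) [(p.1, p.2)] [])).1, sb.2)
          else sb) (vis, out)).2) a b
          = pvExpected grid rows cols labB tmpl (pref ++ suf) a b) := by
  intro suf
  induction suf with
  | nil =>
    intro pref vis out hsplit hdv hvis hlen hrlen hpt
    simp only [List.foldl_nil, List.append_nil]
    exact ⟨hlen, hrlen, hpt⟩
  | cons x t ih =>
    intro pref vis out hsplit hdv hvis hlen hrlen hpt
    obtain ⟨hpl, hnp, hxin, hclosure⟩ := pvPrefix_closed hsplit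
    have hxeta : ((x.1, x.2) : ℕ × ℕ) = x := rfl
    rw [List.foldl_cons]
    by_cases hg : (pvGv grid x.1 x.2 == 1) = true ∧ pvMget vis x.1 x.2 = false
    · rw [if_pos hg]
      have hgvx : pvGv grid x.1 x.2 = 1 := by simpa using hg.1
      have heligx : eligB x.1 x.2 = true := (heligB x hxin).2 hgvx
      have hnof : ¬ ((∃ v, pvLget labT x.1 x.2 = some v) ∨
          (∃ v, pvLget labB x.1 x.2 = some v ∧ v ∈ pref)) := by
        intro hcon
        have := (hvis x).2 hcon
        rw [pvVis, hg.2] at this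
        cases this
      obtain ⟨v, hv1, hv2, hv3, hv4⟩ := pvLab_value_rep hsymB hspecB hxin heligx
      have hrepx : pvLget labB x.1 x.2 = some x := by
        have hvx : v = x := by
          by_contra hne
          have hlt : pvLt v x := ⟨hv4 x .refl, hne⟩
          exact hnof (Or.inr ⟨v, hv1, hclosure v (pvConn_inB hxin hv3) hlt⟩)
        rwa [hvx] at hv1
      have hok_iff : ∀ n : ℕ × ℕ, ((pvGv grid n.1 n.2 == 1) = true ↔ pvGv grid n.1 n.2 = 1) := by
        intro n
        simp
      have hRstep : ∀ p n : ℕ × ℕ, pvLget labB p.1 p.2 = some x →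
          n ∈ pvNbrs rows cols p.1 p.2 → (pvGv grid n.1 n.2 == 1) = true →
          ¬ ((∃ v, pvLget labT n.1 n.2 = some v) ∨
            (∃ v, pvLget labB n.1 n.2 = some v ∧ v ∈ pref)) →
          pvLget labB n.1 n.2 = some x := by
        intro p n hp hn hok _
        have hpin : pvInB rows cols p := pvLab_some_inB hldB hp
        have hnin : pvInB rows cols n := pvNbrs_inB hn
        have hconnxp := (pvLab_get_iff hsymB hspecB hxin hrepx hpin).1 hp
        have heligp : eligB p.1 p.2 = true := pvLab_some_elig hspecB hpin hp
        have heligne : eligB n.1 n.2 = true := (heligB n hnin).2 ((hok_iff n).1 hok)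
        have hE : pvLabE eligB linkedB p n := ⟨heligp, heligne, hlinkB _ _ _ _⟩
        exact (pvLab_get_iff hsymB hspecB hxin hrepx hnin).2 (.step p n hconnxp hn hE)
      have hInv : PvBfsInv rows cols (fun a b => pvGv grid a b == 1)
          (fun p => (∃ v, pvLget labT p.1 p.2 = some v) ∨
            (∃ v, pvLget labB p.1 p.2 = some v ∧ v ∈ pref))
          (fun p => pvLget labB p.1 p.2 = some x)
          (pvMset vis x.1 x.2) [(x.1, x.2)] [] := by
        rw [hxeta]
        refine ⟨pvDims_mset hdv x.1 x.2, List.nodup_singleton x, List.nodup_nil, by simp,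
          ?_, by simp, ?_, by simp, ?_, by simp⟩
        · intro p hp
          rw [List.mem_singleton] at hp
          subst hp
          exact ⟨hxin, by simpa using hgvx⟩
        · intro p
          rw [pvVis_mset hdv hxin p]
          simp only [List.not_mem_nil, false_or, List.mem_singleton]
          rw [hvis p]
          exact or_comm
        · intro p hp
          rw [List.mem_singleton] at hp
          subst hp
          exact hrepx
      have hfuel : ([(x.1, x.2)] : List (ℕ × ℕ)).length +
          pvUnvis rows cols (pvMset vis x.1 x.2) ≤ rows * cols + rows * cols + 1 := by
        have := pv_unvis_le rows cols (pvMset vis x.1 x.2)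
        simp only [List.length_cons, List.length_nil]
        omega
      obtain ⟨hI, hmem⟩ := pvBfs_run rows cols _ _ _ hRstep _ (pvMset vis x.1 x.2)
        [(x.1, x.2)] [] hInv hfuel
      set res := pvBfs rows cols (fun a b => pvGv grid a b == 1)
        (rows * cols + rows * cols + 1) (pvMset vis x.1 x.2) [(x.1, x.2)] [] with hres
      have haccR : ∀ p ∈ res.2, pvLget labB p.1 p.2 = some x := fun p hp => hI.accR p hp
      have hxmem : x ∈ res.2 := by
        have := hmem (x.1, x.2) (Or.inr List.mem_cons_self)
        rwa [hxeta] at this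
      have hclassmem : ∀ q, pvLget labB q.1 q.2 = some x → q ∈ res.2 := by
        intro q hq
        have hqin : pvInB rows cols q := pvLab_some_inB hldB hq
        have hconn := (pvLab_get_iff hsymB hspecB hxin hrepx hqin).1 hq
        refine pvConn_subset_of_closed (Blk := fun p => (∃ v, pvLget labT p.1 p.2 = some v) ∨
          (∃ v, pvLget labB p.1 p.2 = some v ∧ v ∈ pref)) hxmem ?_ ?_ q hconn
        · intro a b ha hb hE
          have hbin : pvInB rows cols b := pvNbrs_inB hb
          have hokb : (pvGv grid b.1 b.2 == 1) = true := by
            simpa using (heligB b hbin).1 hE.2.1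
          have := hI.closed a ha b hb hokb
          have h2 := (hI.visiff b).1 this
          simp only [List.not_mem_nil, or_false] at h2
          exact h2
        · intro q' hq'
          intro hblk
          have hq'lab : pvLget labB q'.1 q'.2 = some x :=
            (pvLab_get_iff hsymB hspecB hxin hrepx (pvConn_inB hxin hq')).2 hq'
          rcases hblk with ⟨w, hw⟩ | ⟨w, hw1, hw2⟩
          · -- a blue cell cannot carry a template label
            have hq'in := pvConn_inB hxin hq'
            have heq : eligT q'.1 q'.2 = true := pvLab_some_elig hspecT hq'in hw
            have h1 := (heligT q' hq'in).1 heq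
            have h2 : pvGv grid q'.1 q'.2 = 1 := by
              have := pvLab_some_elig hspecB hq'in hq'lab
              exact (heligB q' hq'in).1 this
            omega
          · obtain rfl : w = x := by rw [hq'lab] at hw1; injection hw1 with h; exact h.symm
            exact hnp hw2
      have hperm : List.Perm res.2 (pvClassL rows cols labB x) := by
        have hnodB : (pvClassL rows cols labB x).Nodup := by
          rw [pvClassL]
          exact List.Nodup.filter _ (pvCells_nodup rows cols)
        apply (List.perm_ext_iff_of_nodup hI.accnd hnodB).2
        intro q
        rw [pv_mem_classL hldB]
        exact ⟨fun hq => haccR q hq, fun hq => hclassmem q hq⟩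
      have hshape : pvShape res.2 = pvShape (pvClassL rows cols labB x) := pvShape_perm hperm
      have hvis' : ∀ p, pvVis res.1 p ↔ ((∃ v, pvLget labT p.1 p.2 = some v) ∨
          (∃ v, pvLget labB p.1 p.2 = some v ∧ v ∈ pref ++ [x])) := by
        intro p
        rw [hI.visiff p]
        simp only [List.not_mem_nil, or_false, List.mem_append, List.mem_cons]
        constructor
        · rintro ((h | ⟨w, hw1, hw2⟩) | h)
          · exact Or.inl h
          · exact Or.inr ⟨w, hw1, Or.inl hw2⟩
          · exact Or.inr ⟨x, haccR p h, Or.inr rfl⟩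
        · rintro (h | ⟨w, hw1, hw2⟩)
          · exact Or.inl (Or.inl h)
          · rcases hw2 with hw2 | hw2
            · exact Or.inl (Or.inr ⟨w, hw1, hw2⟩)
            · subst hw2
              exact Or.inr (hclassmem p hw1)
      -- the write bounds
      have hbounds : ∀ out' : List (List Int), out'.length = grid.length →
          (∀ i, (out'.getD i []).length = (grid.getD i []).length) →
          ∀ p ∈ res.2, p.1 < out'.length ∧ p.2 < (out'.getD p.1 []).length := by
        intro out' hl hr p hp
        have hpin := hI.accin p hp
        constructor
        · rw [hl, ← hrows]
          exact hpin.1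
        · rw [hr p.1]
          have h2 := hpre p.1 hpin.1
          have h3 := hpin.2
          omega
      cases hm : tmpl.get? (pvShape res.2) with
      | some col =>
        obtain ⟨hwl, hwr, hwp⟩ := pv_writeFold col res.2 out (hbounds out hlen hrlen)
        have hpt' : ∀ a b, pvIget (res.2.foldl (fun o q => pvSetI o q.1 q.2 col) out) a b
            = pvExpected grid rows cols labB tmpl (pref ++ [x]) a b := by
          intro a b
          rw [hwp a b]
          by_cases hab : (a, b) ∈ res.2
          · rw [if_pos hab]
            have hlab : pvLget labB a b = some x := haccR (a, b) hab
            rw [pvExpected_some hlab, if_pos (List.mem_append.2 (Or.inr List.mem_cons_self)),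
              ← hshape, hm, Option.getD_some]
          · rw [if_neg hab, hpt a b]
            cases hl : pvLget labB a b with
            | none => rw [pvExpected_none hl, pvExpected_none hl]
            | some w =>
              rw [pvExpected_some hl, pvExpected_some hl]
              by_cases hwx : w = x
              · subst hwx
                exact absurd (hclassmem (a, b) hl) hab
              · have : (w ∈ pref ++ [x]) ↔ (w ∈ pref) := by
                  simp only [List.mem_append, List.mem_cons, List.not_mem_nil, or_false]
                  exact ⟨fun h => h.resolve_right hwx, Or.inl⟩
                by_cases hwp' : w ∈ pref
                · rw [if_pos hwp', if_pos (this.2 hwp')]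
                · rw [if_neg hwp', if_neg (fun h => hwp' (this.1 h))]
        have := ih (pref ++ [x]) res.1 (res.2.foldl (fun o q => pvSetI o q.1 q.2 col) out)
          (by rw [hsplit]; simp) hI.dims hvis' (by rw [hwl, hlen])
          (fun i => by rw [hwr i, hrlen i]) hpt'
        rw [show (pref ++ x :: t) = ((pref ++ [x]) ++ t) by simp]
        exact this
      | none =>
        have hpt' : ∀ a b, pvIget out a b
            = pvExpected grid rows cols labB tmpl (pref ++ [x]) a b := by
          intro a b
          rw [hpt a b]
          cases hl : pvLget labB a b with
          | none => rw [pvExpected_none hl, pvExpected_none hl]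
          | some w =>
            rw [pvExpected_some hl, pvExpected_some hl]
            by_cases hwx : w = x
            · subst hwx
              rw [if_pos (List.mem_append.2 (Or.inr List.mem_cons_self)),
                ← hshape, hm, Option.getD_none]
              rw [if_neg (fun hcon => hnp (hcon : w ∈ pref))]
            · have : (w ∈ pref ++ [x]) ↔ (w ∈ pref) := by
                simp only [List.mem_append, List.mem_cons, List.not_mem_nil, or_false]
                exact ⟨fun h => h.resolve_right hwx, Or.inl⟩
              by_cases hwp' : w ∈ pref
              · rw [if_pos hwp', if_pos (this.2 hwp')]
              · rw [if_neg hwp', if_neg (fun h => hwp' (this.1 h))]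
        have := ih (pref ++ [x]) res.1 out (by rw [hsplit]; simp) hI.dims hvis' hlen hrlen hpt'
        rw [show (pref ++ x :: t) = ((pref ++ [x]) ++ t) by simp]
        exact this
    · rw [if_neg hg]
      have hnotrep : ¬ pvLget labB x.1 x.2 = some x := by
        intro hrep
        have heligx : eligB x.1 x.2 = true := pvLab_some_elig hspecB hxin hrep
        have hgvx : pvGv grid x.1 x.2 = 1 := (heligB x hxin).1 heligx
        have hvisx : pvMget vis x.1 x.2 = true := by
          cases hb : pvMget vis x.1 x.2 with
          | true => rfl
          | false => exact absurd ⟨by simpa using hgvx, hb⟩ hg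
        rcases (hvis x).1 hvisx with ⟨w, hw⟩ | ⟨w, hw1, hw2⟩
        · have heq : eligT x.1 x.2 = true := pvLab_some_elig hspecT hxin hw
          have h1 := (heligT x hxin).1 heq
          omega
        · obtain rfl : w = x := by rw [hrep] at hw1; injection hw1 with h; exact h.symm
          exact hnp hw2
      have hvis' : ∀ p, pvVis vis p ↔ ((∃ v, pvLget labT p.1 p.2 = some v) ∨
          (∃ v, pvLget labB p.1 p.2 = some v ∧ v ∈ pref ++ [x])) := by
        intro p
        rw [hvis p]
        constructor
        · rintro (h | ⟨w, hw1, hw2⟩)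
          · exact Or.inl h
          · exact Or.inr ⟨w, hw1, List.mem_append.2 (Or.inl hw2)⟩
        · rintro (h | ⟨w, hw1, hw2⟩)
          · exact Or.inl h
          · rcases List.mem_append.1 hw2 with hw2 | hw2
            · exact Or.inr ⟨w, hw1, hw2⟩
            · rw [List.mem_singleton] at hw2
              subst hw2
              have hpin : pvInB rows cols p := pvLab_some_inB hldB hw1
              exact absurd (pvLab_val_rep hsymB hspecB hpin hw1).1 hnotrep
      have hpt' : ∀ a b, pvIget out a b
          = pvExpected grid rows cols labB tmpl (pref ++ [x]) a b := by
        intro a b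
        rw [hpt a b]
        cases hl : pvLget labB a b with
        | none => rw [pvExpected_none hl, pvExpected_none hl]
        | some w =>
          rw [pvExpected_some hl, pvExpected_some hl]
          by_cases hwx : w = x
          · subst hwx
            have hpin : pvInB rows cols (a, b) := pvLab_some_inB hldB hl
            exact absurd (pvLab_val_rep hsymB hspecB hpin hl).1 hnotrep
          · have : (w ∈ pref ++ [x]) ↔ (w ∈ pref) := by
              simp only [List.mem_append, List.mem_cons, List.not_mem_nil, or_false]
              exact ⟨fun h => h.resolve_right hwx, Or.inl⟩
            by_cases hwp' : w ∈ pref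
            · rw [if_pos hwp', if_pos (this.2 hwp')]
            · rw [if_neg hwp', if_neg (fun h => hwp' (this.1 h))]
      have := ih (pref ++ [x]) vis out (by rw [hsplit]; simp) hdv hvis' hlen hrlen hpt'
      rw [show (pref ++ x :: t) = ((pref ++ [x]) ++ t) by simp]
      exact this

-- ---------- the B-side blue recolouring ----------
lemma pvBlueB (grid : List (List Int)) (rows cols : ℕ)
    (labB : List (List (Option (ℕ × ℕ)))) (tmpl : PySem.Dict (List (ℕ × ℕ)) Int)
    (hldB : pvLDims rows cols labB)
    (hrows : rows = grid.length)
    (hpre : ∀ i, i < rows → cols ≤ (grid.getD i []).length) :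
    ∀ (RL done : List (ℕ × ℕ)) (out : List (List Int)),
      out.length = grid.length →
      (∀ i, (out.getD i []).length = (grid.getD i []).length) →
      (∀ a b, pvIget out a b = pvExpected grid rows cols labB tmpl done a b) →
      (∀ k ∈ RL, pvLget labB k.1 k.2 = some k) →
      ((RL.foldl (fun o k =>
          match tmpl.get? (pvShape (pvClassL rows cols labB k)) with
          | some col => (pvClassL rows cols labB k).foldl (fun o q => pvSetI o q.1 q.2 col) o
          | none => o) out).length = grid.length ∧
       (∀ i, ((RL.foldl (fun o k =>
          match tmpl.get? (pvShape (pvClassL rows cols labB k)) with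
          | some col => (pvClassL rows cols labB k).foldl (fun o q => pvSetI o q.1 q.2 col) o
          | none => o) out).getD i []).length = (grid.getD i []).length) ∧
       (∀ a b, pvIget (RL.foldl (fun o k =>
          match tmpl.get? (pvShape (pvClassL rows cols labB k)) with
          | some col => (pvClassL rows cols labB k).foldl (fun o q => pvSetI o q.1 q.2 col) o
          | none => o) out) a b = pvExpected grid rows cols labB tmpl (done ++ RL) a b)) := by
  intro RL
  induction RL with
  | nil =>
    intro done out hlen hrlen hpt _
    simp only [List.foldl_nil, List.append_nil]
    exact ⟨hlen, hrlen, hpt⟩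
  | cons k t ih =>
    intro done out hlen hrlen hpt hrep
    have hrepk := hrep k List.mem_cons_self
    have hkin : pvInB rows cols k := pvLab_some_inB hldB hrepk
    rw [List.foldl_cons]
    have hshift : ∀ (out' : List (List Int)), out'.length = grid.length →
        (∀ i, (out'.getD i []).length = (grid.getD i []).length) →
        (∀ a b, pvIget out' a b = pvExpected grid rows cols labB tmpl (done ++ [k]) a b) →
        ((t.foldl (fun o k =>
          match tmpl.get? (pvShape (pvClassL rows cols labB k)) with
          | some col => (pvClassL rows cols labB k).foldl (fun o q => pvSetI o q.1 q.2 col) o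
          | none => o) out').length = grid.length ∧
        (∀ i, ((t.foldl (fun o k =>
          match tmpl.get? (pvShape (pvClassL rows cols labB k)) with
          | some col => (pvClassL rows cols labB k).foldl (fun o q => pvSetI o q.1 q.2 col) o
          | none => o) out').getD i []).length = (grid.getD i []).length) ∧
        (∀ a b, pvIget (t.foldl (fun o k =>
          match tmpl.get? (pvShape (pvClassL rows cols labB k)) with
          | some col => (pvClassL rows cols labB k).foldl (fun o q => pvSetI o q.1 q.2 col) o
          | none => o) out') a b
          = pvExpected grid rows cols labB tmpl (done ++ k :: t) a b)) := by
      intro out' h1 h2 h3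
      have := ih (done ++ [k]) out' h1 h2 h3 (fun k' hk' => hrep k' (List.mem_cons_of_mem _ hk'))
      rw [show (done ++ k :: t) = ((done ++ [k]) ++ t) by simp]
      exact this
    cases hm : tmpl.get? (pvShape (pvClassL rows cols labB k)) with
    | some col =>
      have hbounds : ∀ p ∈ pvClassL rows cols labB k,
          p.1 < out.length ∧ p.2 < (out.getD p.1 []).length := by
        intro p hp
        have hpin : pvInB rows cols p := pvLab_some_inB hldB ((pv_mem_classL hldB).1 hp)
        constructor
        · rw [hlen, ← hrows]
          exact hpin.1
        · rw [hrlen p.1]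
          have h2 := hpre p.1 hpin.1
          have h3 := hpin.2
          omega
      obtain ⟨hwl, hwr, hwp⟩ := pv_writeFold col (pvClassL rows cols labB k) out hbounds
      apply hshift
      · rw [hwl, hlen]
      · intro i
        rw [hwr i, hrlen i]
      · intro a b
        rw [hwp a b]
        by_cases hab : (a, b) ∈ pvClassL rows cols labB k
        · rw [if_pos hab]
          have hlab : pvLget labB a b = some k := (pv_mem_classL hldB).1 hab
          rw [pvExpected_some hlab, if_pos (List.mem_append.2 (Or.inr List.mem_cons_self)),
            hm, Option.getD_some]
        · rw [if_neg hab, hpt a b]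
          cases hl : pvLget labB a b with
          | none => rw [pvExpected_none hl, pvExpected_none hl]
          | some w =>
            rw [pvExpected_some hl, pvExpected_some hl]
            by_cases hwk : w = k
            · subst hwk
              exact absurd ((pv_mem_classL hldB).2 hl) hab
            · have : (w ∈ done ++ [k]) ↔ (w ∈ done) := by
                simp only [List.mem_append, List.mem_cons, List.not_mem_nil, or_false]
                exact ⟨fun h => h.resolve_right hwk, Or.inl⟩
              by_cases hwd : w ∈ done
              · rw [if_pos hwd, if_pos (this.2 hwd)]
              · rw [if_neg hwd, if_neg (fun h => hwd (this.1 h))]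
    | none =>
      apply hshift out hlen hrlen
      intro a b
      rw [hpt a b]
      cases hl : pvLget labB a b with
      | none => rw [pvExpected_none hl, pvExpected_none hl]
      | some w =>
        rw [pvExpected_some hl, pvExpected_some hl]
        by_cases hwk : w = k
        · subst hwk
          rw [if_pos (List.mem_append.2 (Or.inr List.mem_cons_self)), hm, Option.getD_none]
          simp
        · have : (w ∈ done ++ [k]) ↔ (w ∈ done) := by
            simp only [List.mem_append, List.mem_cons, List.not_mem_nil, or_false]
            exact ⟨fun h => h.resolve_right hwk, Or.inl⟩
          by_cases hwd : w ∈ done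
          · rw [if_pos hwd, if_pos (this.2 hwd)]
          · rw [if_neg hwd, if_neg (fun h => hwd (this.1 h))]
-- ===== VERDICT (by name: the statement is the Claim_ definition above) =====
theorem transform_spec : Claim_equal_transform := by
  intro grid _ hPre
  unfold Spec_transform
  by_cases htriv : grid = [] ∨ grid.headI = []
  · unfold transform transform_alt
    rw [if_pos htriv, if_pos htriv]
  · unfold transform transform_alt
    rw [if_neg htriv, if_neg htriv]
    dsimp only
    simp only [bCell_e, bFlag_e, bShape_e, bPut_e]
    set rows := grid.length with hrowsd
    set cols := grid.headI.length with hcolsd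
    have hrows : 0 < rows := by
      rcases Nat.eq_zero_or_pos rows with h | h
      · exact absurd (List.length_eq_zero_iff.1 h) (fun hh => htriv (Or.inl hh))
      · exact h
    have hcols : 0 < cols := by
      rcases Nat.eq_zero_or_pos cols with h | h
      · exact absurd (List.length_eq_zero_iff.1 h) (fun hh => htriv (Or.inr hh))
      · exact h
    have hpre : ∀ i, i < rows → cols ≤ (grid.getD i []).length := by
      intro i hi
      have : grid.getD i [] ∈ grid := by
        rw [List.getD_eq_getElem _ _ (by exact hi)]
        exact List.getElem_mem _
      exact hPre _ this
    -- flatten the two seeding loops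
    have e1 : (List.range rows).foldl (fun s r => List.foldl (fun (s : List (List Bool) ×
          List (ℕ × ℕ)) c => if pvGv grid r c ≠ 5 ∧ pvMget s.1 r c = false then
          (pvMset s.1 r c, s.2 ++ [(r, c)]) else s) s [0, cols - 1])
          (List.replicate rows (List.replicate cols false), [])
        = ((List.range rows).flatMap (fun r => [0, cols - 1].map (fun c => ((r, c) : ℕ × ℕ)))).foldl
          (fun (s : List (List Bool) × List (ℕ × ℕ)) p =>
            if pvGv grid p.1 p.2 ≠ 5 ∧ pvMget s.1 p.1 p.2 = false then
              (pvMset s.1 p.1 p.2, s.2 ++ [p]) else s)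
          (List.replicate rows (List.replicate cols false), []) := by
      rw [pv_foldl_pairs]
    rw [e1]
    set L1 := (List.range rows).flatMap (fun r => [0, cols - 1].map (fun c => ((r, c) : ℕ × ℕ)))
      with hL1
    set S1 := L1.foldl (fun (s : List (List Bool) × List (ℕ × ℕ)) p =>
        if pvGv grid p.1 p.2 ≠ 5 ∧ pvMget s.1 p.1 p.2 = false then
          (pvMset s.1 p.1 p.2, s.2 ++ [p]) else s)
        (List.replicate rows (List.replicate cols false), []) with hS1
    have e2 : (List.range cols).foldl (fun s c => List.foldl (fun (s : List (List Bool) ×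
          List (ℕ × ℕ)) r => if pvGv grid r c ≠ 5 ∧ pvMget s.1 r c = false then
          (pvMset s.1 r c, s.2 ++ [(r, c)]) else s) s [0, rows - 1]) S1
        = (((List.range cols).flatMap (fun c => [0, rows - 1].map
            (fun r => ((c, r) : ℕ × ℕ)))).map Prod.swap).foldl
          (fun (s : List (List Bool) × List (ℕ × ℕ)) p =>
            if pvGv grid p.1 p.2 ≠ 5 ∧ pvMget s.1 p.1 p.2 = false then
              (pvMset s.1 p.1 p.2, s.2 ++ [p]) else s) S1 := by
      rw [pv_foldl_pairs, List.foldl_map]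
      rfl
    rw [e2]
    set L2 := (((List.range cols).flatMap (fun c => [0, rows - 1].map
        (fun r => ((c, r) : ℕ × ℕ)))).map Prod.swap) with hL2
    set S2 := L2.foldl (fun (s : List (List Bool) × List (ℕ × ℕ)) p =>
        if pvGv grid p.1 p.2 ≠ 5 ∧ pvMget s.1 p.1 p.2 = false then
          (pvMset s.1 p.1 p.2, s.2 ++ [p]) else s) S1 with hS2
    -- membership in the two border lists
    have hmemL1 : ∀ p : ℕ × ℕ, p ∈ L1 ↔ (p.1 < rows ∧ (p.2 = 0 ∨ p.2 = cols - 1)) := by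
      intro p
      rw [hL1]
      simp only [List.mem_flatMap, List.mem_range, List.mem_map, List.mem_cons,
        List.not_mem_nil, or_false]
      constructor
      · rintro ⟨r, hr, c, hc, hrc⟩
        cases hrc
        exact ⟨hr, hc⟩
      · rintro ⟨h1, h2⟩
        exact ⟨p.1, h1, p.2, h2, rfl⟩
    have hmemL2 : ∀ p : ℕ × ℕ, p ∈ L2 ↔ (p.2 < cols ∧ (p.1 = 0 ∨ p.1 = rows - 1)) := by
      intro p
      rw [hL2]
      simp only [List.mem_map, List.mem_flatMap, List.mem_range, List.mem_cons,
        List.not_mem_nil, or_false]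
      constructor
      · rintro ⟨q, ⟨c, hc, r, hr, hq⟩, hqp⟩
        cases hq
        cases hqp
        exact ⟨hc, hr⟩
      · rintro ⟨h1, h2⟩
        exact ⟨(p.2, p.1), ⟨p.2, h1, p.1, h2, rfl⟩, rfl⟩
    have hInL1 : ∀ x ∈ L1, pvInB rows cols x := by
      intro x hx
      rw [hmemL1] at hx
      exact ⟨hx.1, by omega⟩
    have hInL2 : ∀ x ∈ L2, pvInB rows cols x := by
      intro x hx
      rw [hmemL2] at hx
      exact ⟨by omega, hx.1⟩
    -- run the two seeding folds
    have hvis0 : ∀ p, pvVis (List.replicate rows (List.replicate cols false)) p ↔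
        p ∈ ([] : List (ℕ × ℕ)) := by
      intro p
      constructor
      · intro h
        exact absurd h (pvVis_replicate_false rows cols p)
      · intro h
        exact absurd h (List.not_mem_nil)
    have hmf1 := pv_markFold grid rows cols L1
      (List.replicate rows (List.replicate cols false)) [] hInL1
      (pvDims_replicate rows cols) List.nodup_nil hvis0
    rw [← hS1] at hmf1
    have hS1pair : (S1.1, S1.2) = S1 := rfl
    have hmf2 := pv_markFold grid rows cols L2 S1.1 S1.2 hInL2 hmf1.1 hmf1.2.1
      (fun p => by rw [hmf1.2.2.1 p])
    rw [hS1pair, ← hS2] at hmf2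
    have hseeds : ∀ p, p ∈ S2.2 ↔ pvSeedO grid rows cols p := by
      intro p
      rw [hmf2.2.2.2 p, hmf1.2.2.2 p, hmemL1 p, hmemL2 p]
      unfold pvSeedO pvInB
      simp only [List.not_mem_nil, false_or]
      constructor
      · rintro (⟨⟨h1, h2⟩, h3⟩ | ⟨⟨h1, h2⟩, h3⟩)
        · exact ⟨⟨h1, by omega⟩, h3, by omega⟩
        · exact ⟨⟨by omega, h1⟩, h3, by omega⟩
      · rintro ⟨⟨h1, h2⟩, h3, h4⟩
        rcases h4 with h4 | h4 | h4 | h4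
        · exact Or.inr ⟨⟨h2, Or.inl h4⟩, h3⟩
        · exact Or.inr ⟨⟨h2, Or.inr h4⟩, h3⟩
        · exact Or.inl ⟨⟨h1, Or.inl h4⟩, h3⟩
        · exact Or.inl ⟨⟨h1, Or.inr h4⟩, h3⟩
    -- the A-side outside matrix
    obtain ⟨houtsA, hdimsOA⟩ := pvOutside_A_run grid rows cols S2.1 S2.2 hmf2.1 hmf2.2.1
      (fun p => hmf2.2.2.1 p) hseeds
    set outsA := (pvBfs rows cols (fun r c => !(pvGv grid r c == 5))
      (rows * cols + rows * cols + 1) S2.1 S2.2 []).1 with houtsAd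
    -- the B-side outside matrix
    have houtsB := pvOutside_B_run grid rows cols
    set outsB := bLoop (bSat grid rows cols) (rows * cols + 1)
      ((List.range rows).map fun r => (List.range cols).map fun c =>
        !(pvGv grid r c == 5) && (r == 0 || r == rows - 1 || c == 0 || c == cols - 1))
      with houtsBd
    -- the template labelling
    set eligT := (fun r c => decide (1 < pvGv grid r c) && !(pvMget outsB r c)) with heligTd
    set linkedT := (fun r c nr nc => pvGv grid r c == pvGv grid nr nc) with hlinkedTd
    have hsymT : ∀ a b, pvLabE eligT linkedT a b → pvLabE eligT linkedT b a := by
      rintro a b ⟨h1, h2, h3⟩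
      refine ⟨h2, h1, ?_⟩
      rw [hlinkedTd] at h3 ⊢
      simp only [beq_iff_eq] at h3 ⊢
      exact h3.symm
    obtain ⟨hspecT, hldT⟩ := bLabels_spec rows cols eligT linkedT hsymT
    set labT := bLabels rows cols eligT linkedT with hlabTd
    have heligT : ∀ p, pvInB rows cols p →
        (eligT p.1 p.2 = true ↔ (1 < pvGv grid p.1 p.2 ∧ ¬ pvOut grid rows cols p)) := by
      intro p hp
      rw [heligTd]
      simp only [Bool.and_eq_true, decide_eq_true_eq, Bool.not_eq_eq_eq_not, Bool.not_true]
      constructor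
      · rintro ⟨h1, h2⟩
        refine ⟨h1, fun hout => ?_⟩
        have := (houtsB p).2 hout
        rw [pvVis] at this
        rw [this] at h2
        cases h2
      · rintro ⟨h1, h2⟩
        refine ⟨h1, ?_⟩
        cases hb : pvMget outsB p.1 p.2 with
        | false => rfl
        | true => exact absurd ((houtsB p).1 hb) h2
    have hlinkT : ∀ p q : ℕ × ℕ, linkedT p.1 p.2 q.1 q.2 = true ↔
        pvGv grid p.1 p.2 = pvGv grid q.1 q.2 := by
      intro p q
      rw [hlinkedTd]
      simp
    -- the blue labelling
    set eligB := (fun r c => pvGv grid r c == 1) with heligBd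
    set linkedB := (fun (_ _ _ _ : ℕ) => true) with hlinkedBd
    have hsymB : ∀ a b, pvLabE eligB linkedB a b → pvLabE eligB linkedB b a := by
      rintro a b ⟨h1, h2, h3⟩
      exact ⟨h2, h1, rfl⟩
    obtain ⟨hspecB, hldB⟩ := bLabels_spec rows cols eligB linkedB hsymB
    set labB := bLabels rows cols eligB linkedB with hlabBd
    have heligB : ∀ p, pvInB rows cols p →
        (eligB p.1 p.2 = true ↔ pvGv grid p.1 p.2 = 1) := by
      intro p _
      rw [heligBd]
      simp
    have hlinkB : ∀ a b c d : ℕ, linkedB a b c d = true := fun _ _ _ _ => rfl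
    -- flatten and run the A-side template scan
    have e3 : (List.range rows).foldl (fun st r => (List.range cols).foldl
        (fun (st : List (List Bool) × PySem.Dict (List (ℕ × ℕ)) Int) c =>
          if 1 < pvGv grid r c ∧ pvMget st.1 r c = false ∧ pvMget outsA r c = false then
            ((pvBfs rows cols (fun a b => (pvGv grid a b == pvGv grid r c) && !(pvMget outsA a b))
                (rows * cols + rows * cols + 1) (pvMset st.1 r c) [(r, c)] []).1,
             st.2.insert (pvShape (pvBfs rows cols
                (fun a b => (pvGv grid a b == pvGv grid r c) && !(pvMget outsA a b))
                (rows * cols + rows * cols + 1) (pvMset st.1 r c) [(r, c)] []).2)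
              (pvGv grid r c))
          else st) st)
        (List.replicate rows (List.replicate cols false), PySem.Dict.empty)
        = (pvCells rows cols).foldl
          (fun (st : List (List Bool) × PySem.Dict (List (ℕ × ℕ)) Int) p =>
            if 1 < pvGv grid p.1 p.2 ∧ pvMget st.1 p.1 p.2 = false ∧
                pvMget outsA p.1 p.2 = false then
              ((pvBfs rows cols (fun a b => (pvGv grid a b == pvGv grid p.1 p.2) &&
                  !(pvMget outsA a b)) (rows * cols + rows * cols + 1)
                  (pvMset st.1 p.1 p.2) [(p.1, p.2)] []).1,
               st.2.insert (pvShape (pvBfs rows cols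
                  (fun a b => (pvGv grid a b == pvGv grid p.1 p.2) && !(pvMget outsA a b))
                  (rows * cols + rows * cols + 1) (pvMset st.1 p.1 p.2) [(p.1, p.2)] []).2)
                (pvGv grid p.1 p.2))
            else st)
          (List.replicate rows (List.replicate cols false), PySem.Dict.empty) := by
      rw [pv_foldl_cells]
    rw [e3]
    set stT := (pvCells rows cols).foldl
        (fun (st : List (List Bool) × PySem.Dict (List (ℕ × ℕ)) Int) p =>
          if 1 < pvGv grid p.1 p.2 ∧ pvMget st.1 p.1 p.2 = false ∧
              pvMget outsA p.1 p.2 = false then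
            ((pvBfs rows cols (fun a b => (pvGv grid a b == pvGv grid p.1 p.2) &&
                !(pvMget outsA a b)) (rows * cols + rows * cols + 1)
                (pvMset st.1 p.1 p.2) [(p.1, p.2)] []).1,
             st.2.insert (pvShape (pvBfs rows cols
                (fun a b => (pvGv grid a b == pvGv grid p.1 p.2) && !(pvMget outsA a b))
                (rows * cols + rows * cols + 1) (pvMset st.1 p.1 p.2) [(p.1, p.2)] []).2)
              (pvGv grid p.1 p.2))
          else st)
        (List.replicate rows (List.replicate cols false), PySem.Dict.empty) with hstTd
    have hscanT := pvScanT grid rows cols outsA labT eligT linkedT houtsA heligT hlinkT hsymT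
      hspecT hldT (pvCells rows cols) [] (List.replicate rows (List.replicate cols false))
      PySem.Dict.empty (by simp) (pvDims_replicate rows cols)
      (fun p => by
        constructor
        · intro h
          exact absurd h (pvVis_replicate_false rows cols p)
        · rintro ⟨v, _, hv⟩
          cases hv) rfl
    rw [← hstTd] at hscanT
    simp only [List.nil_append] at hscanT
    obtain ⟨hdimsT, hvisT, hTD⟩ := hscanT
    -- flatten the A-side blue scan
    have e4 : (List.range rows).foldl (fun sb r => (List.range cols).foldl
        (fun (sb : List (List Bool) × List (List Int)) c =>
          if (pvGv grid r c == 1) = true ∧ pvMget sb.1 r c = false then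
            match stT.2.get? (pvShape ((pvBfs rows cols (fun a b => pvGv grid a b == 1)
                (rows * cols + rows * cols + 1) (pvMset sb.1 r c) [(r, c)] [])).2) with
            | some col =>
              (((pvBfs rows cols (fun a b => pvGv grid a b == 1)
                  (rows * cols + rows * cols + 1) (pvMset sb.1 r c) [(r, c)] [])).1,
               ((pvBfs rows cols (fun a b => pvGv grid a b == 1)
                  (rows * cols + rows * cols + 1) (pvMset sb.1 r c) [(r, c)] [])).2.foldl
                  (fun o p => pvSetI o p.1 p.2 col) sb.2)
            | none =>
              (((pvBfs rows cols (fun a b => pvGv grid a b == 1)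
                  (rows * cols + rows * cols + 1) (pvMset sb.1 r c) [(r, c)] [])).1, sb.2)
          else sb) sb) (stT.1, grid)
        = (pvCells rows cols).foldl (fun (sb : List (List Bool) × List (List Int)) p =>
          if (pvGv grid p.1 p.2 == 1) = true ∧ pvMget sb.1 p.1 p.2 = false then
            match stT.2.get? (pvShape ((pvBfs rows cols (fun a b => pvGv grid a b == 1)
                (rows * cols + rows * cols + 1) (pvMset sb.1 p.1 p.2) [(p.1, p.2)] [])).2) with
            | some col =>
              (((pvBfs rows cols (fun a b => pvGv grid a b == 1)
                  (rows * cols + rows * cols + 1) (pvMset sb.1 p.1 p.2) [(p.1, p.2)] [])).1,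
               ((pvBfs rows cols (fun a b => pvGv grid a b == 1)
                  (rows * cols + rows * cols + 1) (pvMset sb.1 p.1 p.2) [(p.1, p.2)] [])).2.foldl
                  (fun o q => pvSetI o q.1 q.2 col) sb.2)
            | none =>
              (((pvBfs rows cols (fun a b => pvGv grid a b == 1)
                  (rows * cols + rows * cols + 1) (pvMset sb.1 p.1 p.2) [(p.1, p.2)] [])).1, sb.2)
          else sb) (stT.1, grid) := by
      rw [pv_foldl_cells]
    rw [e4]
    -- value cells are in pvCells
    have hvalmem : ∀ p v : ℕ × ℕ, pvLget labT p.1 p.2 = some v → v ∈ pvCells rows cols := by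
      intro p v h
      have hpin := pvLab_some_inB hldT h
      have := (pvLab_val_rep hsymT hspecT hpin h).1
      exact mem_pvCells.2 (pvLab_some_inB hldT this)
    have hscanB := pvScanB grid rows cols labT labB eligT linkedT eligB linkedB stT.2
      heligT hspecT heligB hlinkB hsymB hspecB hldB hrowsd hpre (pvCells rows cols) []
      stT.1 grid (by simp) hdimsT
      (fun p => by
        rw [hvisT p]
        constructor
        · rintro ⟨v, h1, _⟩
          exact Or.inl ⟨v, h1⟩
        · rintro (⟨v, h1⟩ | ⟨v, _, hv⟩)
          · exact ⟨v, h1, hvalmem p v h1⟩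
          · cases hv)
      rfl (fun i => rfl)
      (fun a b => by
        cases hl : pvLget labB a b with
        | none => rw [pvExpected_none hl]; rfl
        | some v =>
          rw [pvExpected_some hl, if_neg (List.not_mem_nil)]
          rfl)
    simp only [List.nil_append] at hscanB
    obtain ⟨hAlen, hArow, hApt⟩ := hscanB
    -- the B side: its template dictionary is the same as A's
    rw [pvTmpl_eq hsymT hspecT hldT, ← hTD]
    -- the B-side blue recolouring
    rw [bGroups_items hsymB hspecB hldB, List.foldl_map]
    set repList := (pvCells rows cols).filter (fun x => pvLget labB x.1 x.2 == some x)
      with hrepListd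
    have eBB : repList.foldl (fun o k => (fun (o : List (List Int))
        (kv : (ℕ × ℕ) × List (ℕ × ℕ)) =>
          match stT.2.get? (pvShape kv.2) with
          | some col => kv.2.foldl (fun o p => pvSetI o p.1 p.2 col) o
          | none => o) o ((fun k => (k, pvClassL rows cols labB k)) k)) grid
        = repList.foldl (fun o k =>
          match stT.2.get? (pvShape (pvClassL rows cols labB k)) with
          | some col => (pvClassL rows cols labB k).foldl (fun o q => pvSetI o q.1 q.2 col) o
          | none => o) grid := rfl
    rw [eBB]
    have hrepAll : ∀ k ∈ repList, pvLget labB k.1 k.2 = some k := by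
      intro k hk
      rw [hrepListd, List.mem_filter] at hk
      simpa using hk.2
    have hBB := pvBlueB grid rows cols labB stT.2 hldB hrowsd hpre repList [] grid rfl
      (fun i => rfl)
      (fun a b => by
        cases hl : pvLget labB a b with
        | none => rw [pvExpected_none hl]; rfl
        | some v =>
          rw [pvExpected_some hl, if_neg (List.not_mem_nil)]
          rfl)
      hrepAll
    simp only [List.nil_append] at hBB
    obtain ⟨hBlen, hBrow, hBpt⟩ := hBB
    -- the two outputs agree pointwise
    refine pvIMatrix_ext (by rw [hAlen, hBlen]) (fun i => by rw [hArow i, hBrow i]) ?_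
    intro a b
    rw [hApt a b, hBpt a b]
    cases hl : pvLget labB a b with
    | none => rw [pvExpected_none hl, pvExpected_none hl]
    | some v =>
      rw [pvExpected_some hl, pvExpected_some hl]
      have hpin : pvInB rows cols (a, b) := pvLab_some_inB hldB hl
      have hvv := (pvLab_val_rep hsymB hspecB hpin hl).1
      have hvin : pvInB rows cols v := pvLab_some_inB hldB hvv
      rw [if_pos (mem_pvCells.2 hvin), if_pos (by
        rw [hrepListd, List.mem_filter]
        exact ⟨mem_pvCells.2 hvin, by simp [hvv]⟩)]
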